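-- pv_equiv track=rewrite | github.com/liupengsay/PyIsTheBestLang | algorithm/src/graph/union_find.py | lc_2503
-- ===== SOURCE A (Python) =====
-- from typing import List
-- from collections import defaultdict, Counter
--
-- class UnionFind:
--     def __init__(self, n: int) -> None:
--         self.root = [i for i in range(n)]
--         self.size = [1] * n
--         self.part = n
--         return
--
--     def find(self, x):
--         lst = []
--         while x != self.root[x]:
--             lst.append(x)
--             # 在查询的时候合并到顺带直接根节点
--             x = self.root[x]
--         for w in lst:
--             self.root[w] = x
--         return x
--
--     def union(self, x, y):
--         root_x = self.find(x)
--         root_y = self.find(y)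
--         if root_x == root_y:
--             return False
--         if self.size[root_x] >= self.size[root_y]:
--             root_x, root_y = root_y, root_x
--         self.root[root_x] = root_y
--         self.size[root_y] += self.size[root_x]
--         # 将非根节点的秩赋0
--         self.size[root_x] = 0
--         self.part -= 1
--         return True
--
--     def is_connected(self, x, y):
--         return self.find(x) == self.find(y)
--
--     def get_root_part(self):
--         # 获取每个根节点对应的组
--         part = defaultdict(list)
--         n = len(self.root)
--         for i in range(n):
--             part[self.find(i)].append(i)
--         return part
--
--     def get_root_size(self):
--         # 获取每个根节点对应的组大小
--         size = defaultdict(int)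
--         n = len(self.root)
--         for i in range(n):
--             size[self.find(i)] = self.size[self.find(i)]
--         return size
--
-- def lc_2503(grid: List[List[int]], queries: List[int]) -> List[int]:
--     # 模板：并查集与离线排序查询结合
--     dct = []
--     # 根据邻居关系进行建图处理
--     m, n = len(grid), len(grid[0])
--     for i in range(m):
--         for j in range(n):
--             if i + 1 < m:
--                 x, y = grid[i][j], grid[i + 1][j]
--                 dct.append([i * n + j, i * n + n + j, x if x > y else y])
--             if j + 1 < n:
--                 x, y = grid[i][j], grid[i][j + 1]
--                 dct.append([i * n + j, i * n + 1 + j, x if x > y else y])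
--     dct.sort(key=lambda d: d[2])
--     uf = UnionFind(m * n)
--
--     # 按照查询值的大小排序，依次进行查询
--     k = len(queries)
--     ind = list(range(k))
--     ind.sort(key=lambda d: queries[d])
--
--     # 根据查询值的大小利用指针持续更新并查集
--     ans = [0]*k
--     j = 0
--     length = len(dct)
--     for i in ind:
--         cur = queries[i]
--         while j < length and dct[j][2] < cur:
--             uf.union(dct[j][0], dct[j][1])
--             j += 1
--         if cur > grid[0][0]:
--             ans[i] = uf.size[uf.find(0)]
--     return ans
-- ===== SOURCE B (Python) =====
-- def lc_2503(grid, queries):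
--     # per-query flood fill by repeated row-major sweeps (no union-find, no sorting)
--     m, n = len(grid), len(grid[0])
--     ans = []
--     for q in queries:
--         if grid[0][0] >= q:
--             ans.append(0)
--             continue
--         seen = {(0, 0)}
--         changed = True
--         while changed:
--             changed = False
--             for x in range(m):
--                 for y in range(n):
--                     if (x, y) not in seen and grid[x][y] < q and \
--                        ((x + 1, y) in seen or (x - 1, y) in seen or
--                         (x, y + 1) in seen or (x, y - 1) in seen):
--                         seen.add((x, y))
--                         changed = True
--         ans.append(len(seen))
--     return ans
-- ===== Notes on version B (the rewrite author's own statement) =====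
-- stated objective: simpler
-- what changed: Replaces the offline edge-sort + union-find + sorted-query pointer sweep by an independent per-query flood fill (repeated row-major sweeps from (0,0) until no new cell with value < q is added), counting the flooded cells.
import Mathlib
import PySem

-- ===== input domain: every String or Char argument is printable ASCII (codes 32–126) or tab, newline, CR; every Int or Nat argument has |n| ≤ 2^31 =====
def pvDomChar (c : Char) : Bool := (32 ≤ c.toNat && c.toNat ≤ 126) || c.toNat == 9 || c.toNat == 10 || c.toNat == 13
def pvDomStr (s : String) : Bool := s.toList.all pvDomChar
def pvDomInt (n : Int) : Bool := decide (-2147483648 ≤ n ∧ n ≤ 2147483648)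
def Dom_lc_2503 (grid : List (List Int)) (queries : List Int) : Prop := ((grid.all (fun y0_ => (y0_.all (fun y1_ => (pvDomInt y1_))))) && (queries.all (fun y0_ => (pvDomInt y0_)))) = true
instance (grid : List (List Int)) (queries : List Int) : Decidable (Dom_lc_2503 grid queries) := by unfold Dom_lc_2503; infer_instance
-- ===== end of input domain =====

-- B replaces A's offline edge-sort + union-find sweep by an independent per-query flood
-- fill (repeated row-major sweeps until no new cell is added); equal return values on Pre_.

-- grid[i][j], total stand-in: exact wherever Python does not raise (guaranteed by Pre_)
def pvCell (grid : List (List Int)) (i j : Int) : Int :=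
  PySem.List.pyGetD (PySem.List.pyGetD grid i []) j 0

-- ===== PORT A =====
structure UFS where
  root : List Int
  size : List Int
  part : Int

-- UnionFind.find: the while-loop collecting lst (fuel covers any acyclic parent chain)
def pvFindLoop (fuel : Nat) (root : List Int) (x : Int) (lst : List Int) : List Int × Int :=
  match fuel with
  | 0 => (lst, x)
  | fuel+1 =>
    if x ≠ PySem.List.pyGetD root x 0 then
      pvFindLoop fuel root (PySem.List.pyGetD root x 0) (lst ++ [x])
    else (lst, x)

-- UnionFind.find: returns (root array after path compression, found root)
def pvFind (root : List Int) (x : Int) : List Int × Int :=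
  let r := pvFindLoop (root.length + 1) root x []
  (r.1.foldl (fun rt w => PySem.List.pySetD rt w r.2) root, r.2)

def pvUnion (uf : UFS) (x y : Int) : UFS :=
  let fx := pvFind uf.root x
  let fy := pvFind fx.1 y
  if fx.2 = fy.2 then { uf with root := fy.1 }
  else
    let p := if PySem.List.pyGetD uf.size fx.2 0 ≥ PySem.List.pyGetD uf.size fy.2 0
             then (fy.2, fx.2) else (fx.2, fy.2)
    { root := PySem.List.pySetD fy.1 p.1 p.2,
      size := PySem.List.pySetD
        (PySem.List.pySetD uf.size p.2
          (PySem.List.pyGetD uf.size p.2 0 + PySem.List.pyGetD uf.size p.1 0)) p.1 0,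
      part := uf.part - 1 }

-- the double loop building dct (python lists [a, b, w] ported as triples (a, b, w))
def pvEdges (grid : List (List Int)) (m n : Int) : List (Int × Int × Int) :=
  (PySem.List.pyRange 0 m 1).foldl (fun acc i =>
    (PySem.List.pyRange 0 n 1).foldl (fun acc j =>
      let acc := if i + 1 < m then
          acc ++ [(i*n+j, i*n+n+j,
            if pvCell grid i j > pvCell grid (i+1) j then pvCell grid i j else pvCell grid (i+1) j)]
        else acc
      if j + 1 < n then
          acc ++ [(i*n+j, i*n+1+j,
            if pvCell grid i j > pvCell grid i (j+1) then pvCell grid i j else pvCell grid i (j+1))]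
      else acc) acc) []

-- the 'while j < length and dct[j][2] < cur' pointer loop (fuel ≥ number of edges left)
def pvSweep (fuel : Nat) (dct : List (Int × Int × Int)) (length cur : Int) (j : Int) (uf : UFS) :
    Int × UFS :=
  match fuel with
  | 0 => (j, uf)
  | fuel+1 =>
    if j < length ∧ (PySem.List.pyGetD dct j (0,0,0)).2.2 < cur then
      pvSweep fuel dct length cur (j+1)
        (pvUnion uf (PySem.List.pyGetD dct j (0,0,0)).1 (PySem.List.pyGetD dct j (0,0,0)).2.1)
    else (j, uf)

def lc_2503 (grid : List (List Int)) (queries : List Int) : List Int :=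
  let m := PySem.List.len grid
  let n := PySem.List.len (PySem.List.pyGetD grid 0 [])
  let dct := PySem.List.sorted (pvEdges grid m n) (fun d => d.2.2) false
  let uf0 : UFS := { root := PySem.List.pyRange 0 (m*n) 1,
                     size := PySem.List.pyRepeat [1] (m*n), part := m*n }
  let k := PySem.List.len queries
  let ind := PySem.List.sorted (PySem.List.pyRange 0 k 1) (fun d => PySem.List.pyGetD queries d 0) false
  let length := PySem.List.len dct
  let st := ind.foldl (fun (st : Int × UFS × List Int) i =>
      let cur := PySem.List.pyGetD queries i 0
      let sw := pvSweep (dct.length + 1) dct length cur st.1 st.2.1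
      if cur > pvCell grid 0 0 then
        let f := pvFind sw.2.root 0
        (sw.1, { sw.2 with root := f.1 },
         PySem.List.pySetD st.2.2 i (PySem.List.pyGetD sw.2.size f.2 0))
      else (sw.1, sw.2, st.2.2))
    (0, uf0, PySem.List.pyRepeat [0] k)
  st.2.2

-- ===== PORT B =====
-- one row-major sweep over all cells: state (seen, changed)
def pvFloodPass (grid : List (List Int)) (m n q : Int) (st : PySem.Set (Int × Int) × Bool) :
    PySem.Set (Int × Int) × Bool :=
  (PySem.List.pyRange 0 m 1).foldl (fun st x =>
    (PySem.List.pyRange 0 n 1).foldl (fun st y =>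
      if ¬ (PySem.Set.contains st.1 (x, y) = true) ∧ pvCell grid x y < q ∧
         (PySem.Set.contains st.1 (x+1, y) = true ∨ PySem.Set.contains st.1 (x-1, y) = true ∨
          PySem.Set.contains st.1 (x, y+1) = true ∨ PySem.Set.contains st.1 (x, y-1) = true)
      then (PySem.Set.add st.1 (x, y), true) else st) st) st

-- 'while changed' loop (fuel ≥ m*n+1 always suffices: each repeated pass grows seen)
def pvFlood (fuel : Nat) (grid : List (List Int)) (m n q : Int) (seen : PySem.Set (Int × Int)) :
    PySem.Set (Int × Int) :=
  match fuel with
  | 0 => seen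
  | fuel+1 =>
    let p := pvFloodPass grid m n q (seen, false)
    if p.2 then pvFlood fuel grid m n q p.1 else p.1

def lc_2503_alt (grid : List (List Int)) (queries : List Int) : List Int :=
  let m := PySem.List.len grid
  let n := PySem.List.len (PySem.List.pyGetD grid 0 [])
  queries.foldl (fun ans q =>
    if pvCell grid 0 0 ≥ q then ans ++ [0]
    else ans ++ [PySem.List.len
      (pvFlood ((m*n).toNat + 1) grid m n q (PySem.Set.ofList [((0:Int), (0:Int))]))]) []

-- ===== PRECONDITION & SPEC =====
-- Pre_ excludes exactly the inputs where the Python A raises (IndexError): the empty grid,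
-- a row shorter than row 0, and a nonempty query list with an empty first row.
def Pre_lc_2503 (grid : List (List Int)) (queries : List Int) : Prop :=
  grid ≠ [] ∧ (∀ row ∈ grid, grid.headI.length ≤ row.length) ∧ (grid.headI = [] → queries = [])
instance (grid : List (List Int)) (queries : List Int) : Decidable (Pre_lc_2503 grid queries) := by
  unfold Pre_lc_2503; infer_instance
def pvWitness_lc_2503 : List (List Int) × List Int := ([[0, 1], [2, 1]], [2, 0])

def Spec_lc_2503 (grid : List (List Int)) (queries : List Int) (out : List Int) : Prop := out = lc_2503_alt grid queries
instance (grid : List (List Int)) (queries : List Int) (out : List Int) : Decidable (Spec_lc_2503 grid queries out) := by unfold Spec_lc_2503; infer_instance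

-- ===== CLAIM (what is proved, stated in full; the proofs are below) =====
def Claim_equal_lc_2503 : Prop := ∀ (grid : List (List Int)) (queries : List Int), Dom_lc_2503 grid queries → Pre_lc_2503 grid queries → Spec_lc_2503 grid queries (lc_2503 grid queries)

-- ===== LEMMAS AND PROOFS =====

def pvPf (root : List Int) (i : Nat) : Nat := (root.getD i (i : Int)).toNat
def pvRho (root : List Int) (i : Nat) : Nat := (pvPf root)^[root.length] i
def pvRangeOK (root : List Int) : Prop :=
  ∀ i, (h : i < root.length) → 0 ≤ root[i] ∧ root[i] < (root.length : Int)
def pvAcyclic (root : List Int) : Prop :=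
  ∀ i < root.length, ∀ k, 0 < k → (pvPf root)^[k] i = i → pvPf root i = i
def pvGood (root : List Int) : Prop := pvRangeOK root ∧ pvAcyclic root

lemma pvAbsorb (f : Nat → Nat) (x t : Nat) (k : Nat) (hk : f^[k] x = t) (ht : f t = t) :
    ∀ s, k ≤ s → f^[s] x = t := by
  intro s hs
  have h1 : f^[s] x = f^[s - k + k] x := by rw [Nat.sub_add_cancel hs]
  rw [h1, Function.iterate_add_apply, hk, Function.iterate_fixed ht]

lemma pvPf_lt (root : List Int) (hR : pvRangeOK root) (i : Nat) (h : i < root.length) :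
    pvPf root i < root.length := by
  have := hR i h
  unfold pvPf
  rw [List.getD_eq_getElem _ _ h]
  omega

lemma pvPf_ge (root : List Int) (i : Nat) (h : root.length ≤ i) : pvPf root i = i := by
  unfold pvPf
  rw [List.getD_eq_default _ _ h]
  simp

lemma pvPf_iter_lt (root : List Int) (hR : pvRangeOK root) (i : Nat) (h : i < root.length)
    (k : Nat) : (pvPf root)^[k] i < root.length := by
  induction k with
  | zero => simpa
  | succ k ih => rw [Function.iterate_succ_apply']; exact pvPf_lt root hR _ ih

lemma pvRho_fix (root : List Int) (hG : pvGood root) (i : Nat) :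
    pvPf root (pvRho root i) = pvRho root i := by
  by_cases hi : i < root.length
  · obtain ⟨a, ha, b, hb, hne, heq⟩ :=
      Finset.exists_ne_map_eq_of_card_lt_of_maps_to
        (s := Finset.range (root.length + 1)) (t := Finset.range root.length)
        (by simp) (f := fun k => (pvPf root)^[k] i)
        (fun k _ => Finset.mem_range.mpr (pvPf_iter_lt root hG.1 i hi k))
    simp only [Finset.mem_range] at ha hb
    -- wlog a < b
    have key : ∀ a b : Nat, a < b → a < root.length + 1 → (pvPf root)^[a] i = (pvPf root)^[b] i →
        pvPf root (pvRho root i) = pvRho root i := by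
      intro a b hab ha' heq
      set z := (pvPf root)^[a] i with hz
      have hzlt : z < root.length := pvPf_iter_lt root hG.1 i hi a
      have hcyc : (pvPf root)^[b - a] z = z := by
        rw [hz, ← Function.iterate_add_apply]
        rw [Nat.sub_add_cancel (Nat.le_of_lt hab)]
        exact heq.symm
      have hfz : pvPf root z = z := hG.2 z hzlt (b - a) (by omega) hcyc
      have : pvRho root i = z :=
        pvAbsorb _ i z a hz.symm hfz root.length (by omega)
      rw [this]; exact hfz
    rcases Nat.lt_or_ge a b with h | h
    · exact key a b h ha heq
    · have : b < a := by omega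
      exact key b a this hb heq.symm
  · have hfix : pvPf root i = i := pvPf_ge root i (by omega)
    have : pvRho root i = i := Function.iterate_fixed hfix _
    rw [this]; exact hfix

lemma pvRho_lt (root : List Int) (hR : pvRangeOK root) (i : Nat) (h : i < root.length) :
    pvRho root i < root.length := pvPf_iter_lt root hR i h _

lemma pvRho_eq_of_fix (root : List Int) (i : Nat) (h : pvPf root i = i) : pvRho root i = i :=
  Function.iterate_fixed h _

lemma pvRho_pf (root : List Int) (hG : pvGood root) (i : Nat) :
    pvRho root (pvPf root i) = pvRho root i := by
  unfold pvRho
  rw [← Function.iterate_succ_apply, Function.iterate_succ_apply']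
  exact pvRho_fix root hG i

lemma pvRho_eq_of_reach (root : List Int) (hG : pvGood root) (j t k : Nat)
    (ht : pvPf root t = t) (hk : (pvPf root)^[k] j = t) : pvRho root j = t := by
  have h1 : (pvPf root)^[max k root.length] j = t :=
    pvAbsorb _ j t k hk ht _ (le_max_left _ _)
  have h2 : (pvPf root)^[max k root.length] j = pvRho root j :=
    pvAbsorb _ j (pvRho root j) root.length rfl (pvRho_fix root hG j) _ (le_max_right _ _)
  omega

lemma pvAcyclic_of_reachfix (root : List Int)
    (h : ∀ z, ∃ k t, (pvPf root)^[k] z = t ∧ pvPf root t = t) : pvAcyclic root := by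
  intro z _ c hc hcyc
  obtain ⟨k, t, hk, ht⟩ := h z
  have hmul : (pvPf root)^[c * k] z = z := by
    rw [Function.iterate_mul]
    exact Function.iterate_fixed hcyc k
  have hge : k ≤ c * k := Nat.le_mul_of_pos_left k hc
  have := pvAbsorb _ z t k hk ht (c * k) hge
  rw [hmul] at this
  rw [this]; exact ht

lemma pvPf_set (root : List Int) (w c : Nat) (hw : w < root.length) (j : Nat) :
    pvPf (root.set w (c : Int)) j = if j = w then c else pvPf root j := by
  unfold pvPf
  by_cases hj : j = w
  · subst hj
    rw [List.getD_eq_getElem _ _ (by simpa using hw)]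
    simp [List.getElem_set_self (h := by simpa using hw)]
  · simp only [if_neg hj]
    by_cases hjl : j < root.length
    · rw [List.getD_eq_getElem _ _ (by simpa using hjl), List.getD_eq_getElem _ _ hjl]
      rw [List.getElem_set_ne (by omega)]
    · rw [List.getD_eq_default _ _ (by simpa using Nat.le_of_not_lt hjl),
         List.getD_eq_default _ _ (Nat.le_of_not_lt hjl)]

theorem pvModify (root root' : List Int)
    (hG : pvGood root) (hR' : pvRangeOK root')
    (target : Nat → Nat)
    (htfix : ∀ j, pvPf root' (target j) = target j)
    (hbase : ∀ j, pvPf root j = j → ∃ k, (pvPf root')^[k] j = target j)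
    (hstep : ∀ j, pvPf root j ≠ j → (∃ k, (pvPf root')^[k] j = target j) ∨
              (pvPf root' j = pvPf root j ∧ target (pvPf root j) = target j)) :
    pvGood root' ∧ ∀ j, pvRho root' j = target j := by
  have reach : ∀ c j, pvPf root ((pvPf root)^[c] j) = (pvPf root)^[c] j →
      ∃ k, (pvPf root')^[k] j = target j := by
    intro c
    induction c with
    | zero => intro j h; exact hbase j h
    | succ c ih =>
      intro j h
      by_cases hfj : pvPf root j = j
      · exact hbase j hfj
      · rcases hstep j hfj with h1 | ⟨h1, h2⟩
        · exact h1
        · have : pvPf root ((pvPf root)^[c] (pvPf root j)) = (pvPf root)^[c] (pvPf root j) := by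
            rwa [← Function.iterate_succ_apply]
          obtain ⟨k, hk⟩ := ih (pvPf root j) this
          exact ⟨k + 1, by rw [Function.iterate_succ_apply, h1, hk, h2]⟩
  have reachAll : ∀ j, ∃ k, (pvPf root')^[k] j = target j := by
    intro j
    exact reach root.length j (pvRho_fix root hG j)
  have hAc : pvAcyclic root' :=
    pvAcyclic_of_reachfix root' (fun z => by
      obtain ⟨k, hk⟩ := reachAll z
      exact ⟨k, target z, hk, htfix z⟩)
  have hG' : pvGood root' := ⟨hR', hAc⟩
  refine ⟨hG', fun j => ?_⟩
  obtain ⟨k, hk⟩ := reachAll j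
  exact pvRho_eq_of_reach root' hG' j (target j) k (htfix j) hk

theorem pvRedirect (root : List Int) (w : Nat) (hw : w < root.length) (hG : pvGood root) :
    pvGood (root.set w ((pvRho root w : Nat) : Int)) ∧
      ∀ j, pvRho (root.set w ((pvRho root w : Nat) : Int)) j = pvRho root j := by
  have hrw : pvRho root w < root.length := pvRho_lt root hG.1 w hw
  have hpf : ∀ j, pvPf (root.set w ((pvRho root w : Nat) : Int)) j =
      if j = w then pvRho root w else pvPf root j := pvPf_set root w _ hw
  apply pvModify root _ hG
  · intro i hi
    simp only [List.length_set] at hi ⊢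
    by_cases h : i = w
    · subst h
      rw [List.getElem_set_self (h := by simpa using hw)]
      constructor <;> [positivity; exact_mod_cast hrw]
    · rw [List.getElem_set_ne (by omega)]
      exact hG.1 i hi
  · intro j
    rw [hpf]
    by_cases h : pvRho root j = w
    · rw [if_pos h, ← h]
      rw [← h] at *
      exact pvRho_eq_of_fix root _ (pvRho_fix root hG j)
    · rw [if_neg h]
      exact pvRho_fix root hG j
  · intro j hj
    have : pvRho root j = j := pvRho_eq_of_fix root j hj
    exact ⟨0, by simpa using this.symm⟩
  · intro j hj
    by_cases h : j = w
    · subst h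
      refine Or.inl ⟨1, ?_⟩
      rw [Function.iterate_one, hpf, if_pos rfl]
    · exact Or.inr ⟨by rw [hpf, if_neg h], pvRho_pf root hG j⟩

theorem pvLink (root : List Int) (u v : Nat) (hu : u < root.length) (hv : v < root.length)
    (huv : u ≠ v) (hfu : pvPf root u = u) (hfv : pvPf root v = v) (hG : pvGood root) :
    pvGood (root.set u ((v : Nat) : Int)) ∧
      ∀ j, pvRho (root.set u ((v : Nat) : Int)) j =
        if pvRho root j = u then v else pvRho root j := by
  have hpf : ∀ j, pvPf (root.set u ((v : Nat) : Int)) j =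
      if j = u then v else pvPf root j := pvPf_set root u v hu
  apply pvModify root _ hG
  · intro i hi
    simp only [List.length_set] at hi ⊢
    by_cases h : i = u
    · subst h
      rw [List.getElem_set_self (h := by simpa using hu)]
      constructor <;> [positivity; exact_mod_cast hv]
    · rw [List.getElem_set_ne (by omega)]
      exact hG.1 i hi
  · intro j
    by_cases h : pvRho root j = u
    · rw [if_pos h, hpf, if_neg (Ne.symm huv)]
      exact hfv
    · rw [if_neg h, hpf, if_neg h]
      exact pvRho_fix root hG j
  · intro j hj
    have hrj : pvRho root j = j := pvRho_eq_of_fix root j hj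
    by_cases h : j = u
    · subst h
      rw [if_pos hrj]
      exact ⟨1, by rw [Function.iterate_one, hpf, if_pos rfl]⟩
    · rw [if_neg (by rw [hrj]; exact h)]
      exact ⟨0, by simpa using hrj.symm⟩
  · intro j hj
    have h : j ≠ u := fun he => hj (he ▸ hfu)
    refine Or.inr ⟨by rw [hpf, if_neg h], ?_⟩
    rw [pvRho_pf root hG j]
-- ===== chunk 2 =====
lemma pvGetRoot (root : List Int) (hR : pvRangeOK root) (i : Nat) (h : i < root.length) :
    PySem.List.pyGetD root (i : Int) 0 = ((pvPf root i : Nat) : Int) := by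
  have hb := hR i h
  rw [PySem.List.pyGetD_natCast]
  unfold pvPf
  rw [List.getD_eq_getElem _ _ h, List.getD_eq_getElem _ _ h]
  rw [Int.toNat_of_nonneg hb.1]

lemma pvRoot_iff (root : List Int) (hG : pvGood root) (r : Nat) :
    pvRho root r = r ↔ pvPf root r = r := by
  constructor
  · intro h
    by_cases hr : r < root.length
    · by_contra hne
      exact hne (hG.2 r hr root.length (by omega) h)
    · exact pvPf_ge root r (by omega)
  · exact pvRho_eq_of_fix root r

lemma pvFindLoop_spec (root : List Int) (hG : pvGood root) :
    ∀ (k : Nat) (i : Nat) (lst : List Int), i < root.length →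
    pvPf root ((pvPf root)^[k] i) = (pvPf root)^[k] i →
    ∃ lst' : List Int,
      pvFindLoop (k+1) root (i : Int) lst = (lst ++ lst', ((pvRho root i : Nat) : Int)) ∧
      ∀ w ∈ lst', ∃ jn : Nat, w = (jn : Int) ∧ jn < root.length ∧ pvRho root jn = pvRho root i := by
  intro k
  induction k with
  | zero =>
    intro i lst hi hfix
    simp only [Function.iterate_zero, id] at hfix
    refine ⟨[], ?_, by simp⟩
    have hrho : pvRho root i = i := pvRho_eq_of_fix root i hfix
    rw [pvFindLoop]
    rw [pvGetRoot root hG.1 i hi, hfix, hrho]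
    simp
  | succ k ih =>
    intro i lst hi hfix
    by_cases hfi : pvPf root i = i
    · have hrho : pvRho root i = i := pvRho_eq_of_fix root i hfi
      refine ⟨[], ?_, by simp⟩
      rw [pvFindLoop]
      rw [pvGetRoot root hG.1 i hi, hfi, hrho]
      simp
    · have hlt : pvPf root i < root.length := pvPf_lt root hG.1 i hi
      have hfix' : pvPf root ((pvPf root)^[k] (pvPf root i)) = (pvPf root)^[k] (pvPf root i) := by
        rwa [← Function.iterate_succ_apply]
      obtain ⟨lst', heq, hmem⟩ := ih (pvPf root i) (lst ++ [(i : Int)]) hlt hfix'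
      refine ⟨(i : Int) :: lst', ?_, ?_⟩
      · rw [pvFindLoop]
        rw [pvGetRoot root hG.1 i hi]
        rw [if_pos (by exact_mod_cast fun h => hfi (by exact_mod_cast h.symm))]
        rw [heq, pvRho_pf root hG i]
        simp
      · intro w hw
        rcases List.mem_cons.mp hw with hw | hw
        · exact ⟨i, hw, hi, rfl⟩
        · obtain ⟨jn, h1, h2, h3⟩ := hmem w hw
          exact ⟨jn, h1, h2, h3.trans (pvRho_pf root hG i)⟩

lemma pvCompressFold (root0 : List Int) (r : Nat) :
    ∀ (lst : List Int) (cur : List Int), cur.length = root0.length → pvGood cur →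
    (∀ j, pvRho cur j = pvRho root0 j) →
    (∀ w ∈ lst, ∃ jn : Nat, w = (jn : Int) ∧ jn < root0.length ∧ pvRho root0 jn = r) →
    (∀ j, pvRho (lst.foldl (fun rt w => PySem.List.pySetD rt w ((r : Nat) : Int)) cur) j = pvRho root0 j) ∧
    pvGood (lst.foldl (fun rt w => PySem.List.pySetD rt w ((r : Nat) : Int)) cur) ∧
    (lst.foldl (fun rt w => PySem.List.pySetD rt w ((r : Nat) : Int)) cur).length = root0.length := by
  intro lst
  induction lst with
  | nil => intro cur h1 h2 h3 _; exact ⟨h3, h2, h1⟩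
  | cons w ws ih =>
    intro cur h1 h2 h3 h4
    obtain ⟨jn, hw, hjl, hjr⟩ := h4 w (by simp)
    subst hw
    have hset : PySem.List.pySetD cur (jn : Int) ((r : Nat) : Int) = cur.set jn ((r : Nat) : Int) := by
      simp [PySem.List.pySetD_natCast]
    have hrr : pvRho cur jn = r := by rw [h3]; exact hjr
    have hred := pvRedirect cur jn (by omega) h2
    rw [hrr] at hred
    simp only [List.foldl_cons, hset]
    exact ih (cur.set jn ((r : Nat) : Int)) (by simpa using h1) hred.1
      (fun j => (hred.2 j).trans (h3 j)) (fun w' hw' => h4 w' (List.mem_cons_of_mem _ hw'))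

lemma pvFind_spec (root : List Int) (hG : pvGood root) (i : Nat) (hi : i < root.length) :
    (pvFind root (i : Int)).2 = ((pvRho root i : Nat) : Int) ∧
    (pvFind root (i : Int)).1.length = root.length ∧
    pvGood (pvFind root (i : Int)).1 ∧
    (∀ j, pvRho (pvFind root (i : Int)).1 j = pvRho root j) := by
  obtain ⟨lst', heq, hmem⟩ := pvFindLoop_spec root hG root.length i [] hi (pvRho_fix root hG i)
  rw [List.nil_append] at heq
  have hpv : pvFind root (i : Int) =
      (lst'.foldl (fun rt w => PySem.List.pySetD rt w ((pvRho root i : Nat) : Int)) root,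
       ((pvRho root i : Nat) : Int)) := by
    unfold pvFind
    simp only [heq]
  have hfold := pvCompressFold root (pvRho root i) lst' root rfl hG (fun _ => rfl)
    (fun w hw => hmem w hw)
  rw [hpv]
  exact ⟨rfl, hfold.2.2, hfold.2.1, hfold.1⟩

-- ===== chunk 2b: union =====
def pvSizeOK (root size : List Int) : Prop :=
  size.length = root.length ∧ ∀ r, r < root.length → pvRho root r = r →
    size.getD r 0 = (((Finset.range root.length).filter (fun i => pvRho root i = r)).card : Int)

lemma pvGetD_set_ne (l : List Int) (i j : Nat) (x d : Int) (h : j ≠ i) :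
    (l.set i x).getD j d = l.getD j d := by
  by_cases hj : j < l.length
  · rw [List.getD_eq_getElem _ _ (by simpa using hj), List.getD_eq_getElem _ _ hj,
      List.getElem_set_ne (by omega)]
  · rw [List.getD_eq_default _ _ (by simpa using Nat.le_of_not_lt hj),
      List.getD_eq_default _ _ (Nat.le_of_not_lt hj)]

lemma pvGetD_set_self (l : List Int) (i : Nat) (x d : Int) (h : i < l.length) :
    (l.set i x).getD i d = x := by
  rw [List.getD_eq_getElem _ _ (by simpa using h), List.getElem_set_self (h := by simpa using h)]

lemma pvMergeIff (ra rb u v x y : Nat) (hne : ra ≠ rb)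
    (hperm : (u = ra ∧ v = rb) ∨ (u = rb ∧ v = ra)) :
    ((if x = u then v else x) = (if y = u then v else y)) ↔
      (x = y ∨ (x = ra ∧ rb = y) ∨ (x = rb ∧ ra = y)) := by
  rcases hperm with ⟨h1, h2⟩ | ⟨h1, h2⟩ <;> subst h1 <;> subst h2 <;> split_ifs <;> omega


lemma pvLinkFull (root root2 size : List Int) (ra rb u v : Nat)
    (hr2 : ∀ j, pvRho root2 j = pvRho root j) (hl2 : root2.length = root.length)
    (hG2 : pvGood root2) (hS : pvSizeOK root size)
    (hralt : ra < root.length) (hrblt : rb < root.length)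
    (hrra : pvRho root ra = ra) (hrrb : pvRho root rb = rb)
    (hab : ra ≠ rb) (hperm : (u = ra ∧ v = rb) ∨ (u = rb ∧ v = ra))
    (hpf2u : pvPf root2 u = u) (hpf2v : pvPf root2 v = v) :
    (root2.set u ((v : Nat) : Int)).length = root.length ∧
    pvGood (root2.set u ((v : Nat) : Int)) ∧
    pvSizeOK (root2.set u ((v : Nat) : Int))
      ((size.set v (size.getD v 0 + size.getD u 0)).set u 0) ∧
    ∀ i j, pvRho (root2.set u ((v : Nat) : Int)) i = pvRho (root2.set u ((v : Nat) : Int)) j ↔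
      (pvRho root i = pvRho root j ∨
       (pvRho root i = ra ∧ rb = pvRho root j) ∨
       (pvRho root i = rb ∧ ra = pvRho root j)) := by
  have huv : u ≠ v := by rcases hperm with ⟨h1, h2⟩ | ⟨h1, h2⟩ <;> subst h1 <;> subst h2 <;>
    [exact hab; exact hab.symm]
  have hult : u < root.length := by rcases hperm with ⟨h1, _⟩ | ⟨h1, _⟩ <;> subst h1 <;> assumption
  have hvlt : v < root.length := by rcases hperm with ⟨_, h2⟩ | ⟨_, h2⟩ <;> subst h2 <;> assumption
  have hrru : pvRho root u = u := by rcases hperm with ⟨h1, _⟩ | ⟨h1, _⟩ <;> subst h1 <;> assumption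
  have hrrv : pvRho root v = v := by rcases hperm with ⟨_, h2⟩ | ⟨_, h2⟩ <;> subst h2 <;> assumption
  obtain ⟨hG', hrho0⟩ := pvLink root2 u v (by omega) (by omega) huv hpf2u hpf2v hG2
  have hrho' : ∀ j, pvRho (root2.set u ((v : Nat) : Int)) j =
      if pvRho root j = u then v else pvRho root j := by
    intro j; rw [hrho0 j, hr2 j]
  have hlen' : (root2.set u ((v : Nat) : Int)).length = root.length := by
    simpa using hl2
  refine ⟨hlen', hG', ⟨?_, ?_⟩, ?_⟩
  · simpa using hS.1.trans hl2.symm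
  · intro r hr hrr
    rw [hlen'] at hr
    rw [hrho' r] at hrr
    have hfilter : ∀ w : Nat, w = u ∨ w = v ∨ (w ≠ u ∧ w ≠ v) := by omega
    by_cases hru : r = u
    · exfalso
      rw [hru, if_pos hrru] at hrr
      exact huv hrr.symm
    · have hrfix : pvRho root r = r := by
        by_cases h : pvRho root r = u
        · rw [if_pos h] at hrr
          rw [← hrr] at h ⊢
          exact hrrv
        · rwa [if_neg h] at hrr
      by_cases hrv : r = v
      · rw [hrv]
        rw [pvGetD_set_ne _ _ _ _ _ (Ne.symm huv), pvGetD_set_self _ _ _ _ (by rw [hS.1]; omega)]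
        rw [hS.2 v hvlt hrrv, hS.2 u hult hrru]
        have hpred : ∀ x ∈ Finset.range (root2.set u ((v : Nat) : Int)).length,
            pvRho (root2.set u ((v : Nat) : Int)) x = v ↔ (pvRho root x = v ∨ pvRho root x = u) := by
          intro x _
          rw [hrho' x]
          split_ifs with h <;> simp [h]
        rw [Finset.filter_congr hpred, hlen', Finset.filter_or,
          Finset.card_union_of_disjoint (by
            rw [Finset.disjoint_filter]
            intro x _ h1 h2
            exact huv (by omega))]
        push_cast
        ring
      · rw [pvGetD_set_ne _ _ _ _ _ hru, pvGetD_set_ne _ _ _ _ _ hrv]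
        rw [hS.2 r hr hrfix]
        have hpred : ∀ x ∈ Finset.range (root2.set u ((v : Nat) : Int)).length,
            pvRho (root2.set u ((v : Nat) : Int)) x = r ↔ pvRho root x = r := by
          intro x _
          rw [hrho' x]
          split_ifs with h <;> constructor <;> intro hh <;> omega
        rw [Finset.filter_congr hpred, hlen']
  · intro i j
    rw [hrho' i, hrho' j]
    exact pvMergeIff ra rb u v _ _ hab hperm

lemma pvUnion_spec (root size : List Int) (part : Int) (a b : Nat)
    (ha : a < root.length) (hb : b < root.length) (hG : pvGood root) (hS : pvSizeOK root size) :
    (pvUnion ⟨root, size, part⟩ (a : Int) (b : Int)).root.length = root.length ∧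
    pvGood (pvUnion ⟨root, size, part⟩ (a : Int) (b : Int)).root ∧
    pvSizeOK (pvUnion ⟨root, size, part⟩ (a : Int) (b : Int)).root
      (pvUnion ⟨root, size, part⟩ (a : Int) (b : Int)).size ∧
    ∀ i j, pvRho (pvUnion ⟨root, size, part⟩ (a : Int) (b : Int)).root i =
             pvRho (pvUnion ⟨root, size, part⟩ (a : Int) (b : Int)).root j ↔
      (pvRho root i = pvRho root j ∨
       (pvRho root i = pvRho root a ∧ pvRho root b = pvRho root j) ∨
       (pvRho root i = pvRho root b ∧ pvRho root a = pvRho root j)) := by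
  obtain ⟨hf1v, hf1l, hf1g, hf1r⟩ := pvFind_spec root hG a ha
  obtain ⟨hf2v, hf2l, hf2g, hf2r⟩ :=
    pvFind_spec (pvFind root (a : Int)).1 hf1g b (by rw [hf1l]; exact hb)
  set ra := pvRho root a with hra
  set rb := pvRho root b with hrb
  set root2 := (pvFind (pvFind root (a : Int)).1 (b : Int)).1 with hroot2
  have hr2 : ∀ j, pvRho root2 j = pvRho root j := fun j => (hf2r j).trans (hf1r j)
  have hl2 : root2.length = root.length := by rw [hf2l, hf1l]
  have hf2v' : (pvFind (pvFind root (a : Int)).1 (b : Int)).2 = ((rb : Nat) : Int) := by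
    rw [hf2v, hf1r b]
  have hralt : ra < root.length := pvRho_lt root hG.1 a ha
  have hrblt : rb < root.length := pvRho_lt root hG.1 b hb
  have hrra : pvRho root ra = ra := pvRho_eq_of_fix root ra (pvRho_fix root hG a)
  have hrrb : pvRho root rb = rb := pvRho_eq_of_fix root rb (pvRho_fix root hG b)
  have hpf2a : pvPf root2 ra = ra := (pvRoot_iff root2 hf2g ra).mp (by rw [hr2]; exact hrra)
  have hpf2b : pvPf root2 rb = rb := (pvRoot_iff root2 hf2g rb).mp (by rw [hr2]; exact hrrb)
  by_cases hab : ra = rb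
  · have hcond : (pvFind root ((a : Nat) : Int)).2 = (pvFind (pvFind root (a : Int)).1 (b : Int)).2 := by
      rw [hf1v, hf2v', hab]
    have hres : pvUnion ⟨root, size, part⟩ (a : Int) (b : Int) = { root := root2, size := size, part := part } := by
      unfold pvUnion
      simp only [hroot2.symm] at hcond ⊢
      rw [if_pos hcond]
    rw [hres]
    refine ⟨hl2, hf2g, ⟨by rw [hl2]; exact hS.1, ?_⟩, ?_⟩
    · intro r hr hrr
      rw [hl2] at hr
      have : pvRho root r = r := by rw [← hr2]; exact hrr
      rw [hS.2 r hr this, hl2,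
        Finset.filter_congr (fun x _ => by rw [hr2] :
          ∀ x ∈ Finset.range root.length, pvRho root2 x = r ↔ pvRho root x = r)]
    · intro i j
      simp only [hr2]
      constructor
      · exact fun h => Or.inl h
      · rintro (h | ⟨h1, h2⟩ | ⟨h1, h2⟩)
        · exact h
        · rw [h1, ← hab] at *; omega
        · rw [h1, hab] at *; omega
  · have hcne : ¬ (((ra : Nat) : Int) = ((rb : Nat) : Int)) := by exact_mod_cast hab
    have hcond : ¬ ((pvFind root ((a : Nat) : Int)).2 = (pvFind (pvFind root (a : Int)).1 ((b : Nat) : Int)).2) := by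
      rw [hf1v, hf2v']; exact hcne
    unfold pvUnion
    simp only [hf1v, hf2v', if_neg hcne, PySem.List.pyGetD_natCast]
    by_cases hsz : size.getD ra 0 ≥ size.getD rb 0
    · simp only [if_pos hsz, PySem.List.pySetD_natCast, PySem.List.pyGetD_natCast]
      have h := pvLinkFull root root2 size ra rb rb ra hr2 hl2 hf2g hS hralt hrblt hrra hrrb hab
        (Or.inr ⟨rfl, rfl⟩) hpf2b hpf2a
      exact ⟨h.1, h.2.1, h.2.2.1, h.2.2.2⟩
    · simp only [if_neg hsz, PySem.List.pySetD_natCast, PySem.List.pyGetD_natCast]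
      have h := pvLinkFull root root2 size ra rb ra rb hr2 hl2 hf2g hS hralt hrblt hrra hrrb hab
        (Or.inl ⟨rfl, rfl⟩) hpf2a hpf2b
      exact ⟨h.1, h.2.1, h.2.2.1, h.2.2.2⟩

-- ===== chunk 3: connectivity =====
def pvConn (es : List (Nat × Nat)) : Nat → Nat → Prop :=
  Relation.EqvGen (fun a b => (a, b) ∈ es)

lemma pvConn_mono (es es' : List (Nat × Nat)) (h : ∀ p ∈ es, p ∈ es') (i j : Nat)
    (hc : pvConn es i j) : pvConn es' i j :=
  Relation.EqvGen.mono (fun a b hab => h (a, b) hab) hc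

lemma pvConn_congr (es es' : List (Nat × Nat)) (h : ∀ p, p ∈ es ↔ p ∈ es') (i j : Nat) :
    pvConn es i j ↔ pvConn es' i j :=
  ⟨pvConn_mono es es' (fun p hp => (h p).mp hp) i j,
   pvConn_mono es' es (fun p hp => (h p).mpr hp) i j⟩

lemma pvConn_nil (i j : Nat) (h : pvConn [] i j) : i = j := by
  induction h with
  | rel a b hab => simp at hab
  | refl => rfl
  | symm a b _ ih => omega
  | trans a b c _ _ ih1 ih2 => omega

lemma pvConn_append_pair (es : List (Nat × Nat)) (a b i j : Nat) :
    pvConn (es ++ [(a, b)]) i j ↔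
      (pvConn es i j ∨ (pvConn es i a ∧ pvConn es b j) ∨ (pvConn es i b ∧ pvConn es a j)) := by
  constructor
  · intro h
    induction h with
    | rel x y hxy =>
      rcases List.mem_append.mp hxy with h | h
      · exact Or.inl (Relation.EqvGen.rel _ _ h)
      · simp only [List.mem_singleton, Prod.mk.injEq] at h
        refine Or.inr (Or.inl ⟨?_, ?_⟩)
        · rw [h.1]; exact Relation.EqvGen.refl _
        · rw [h.2]; exact Relation.EqvGen.refl _
    | refl x => exact Or.inl (Relation.EqvGen.refl _)
    | symm x y _ ih =>
      rcases ih with h | ⟨h1, h2⟩ | ⟨h1, h2⟩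
      · exact Or.inl (Relation.EqvGen.symm _ _ h)
      · exact Or.inr (Or.inr ⟨Relation.EqvGen.symm _ _ h2, Relation.EqvGen.symm _ _ h1⟩)
      · exact Or.inr (Or.inl ⟨Relation.EqvGen.symm _ _ h2, Relation.EqvGen.symm _ _ h1⟩)
    | trans x y z _ _ ih1 ih2 =>
      rcases ih1 with h1 | ⟨h1, h1'⟩ | ⟨h1, h1'⟩ <;>
        rcases ih2 with h2 | ⟨h2, h2'⟩ | ⟨h2, h2'⟩
      · exact Or.inl (Relation.EqvGen.trans _ _ _ h1 h2)
      · exact Or.inr (Or.inl ⟨Relation.EqvGen.trans _ _ _ h1 h2, h2'⟩)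
      · exact Or.inr (Or.inr ⟨Relation.EqvGen.trans _ _ _ h1 h2, h2'⟩)
      · exact Or.inr (Or.inl ⟨h1, Relation.EqvGen.trans _ _ _ h1' h2⟩)
      · exact Or.inr (Or.inl ⟨h1, h2'⟩)
      · exact Or.inl (Relation.EqvGen.trans _ _ _ h1 h2')
      · exact Or.inr (Or.inr ⟨h1, Relation.EqvGen.trans _ _ _ h1' h2⟩)
      · exact Or.inl (Relation.EqvGen.trans _ _ _ h1 h2')
      · exact Or.inr (Or.inr ⟨h1, h2'⟩)
  · have hmono : ∀ x y, pvConn es x y → pvConn (es ++ [(a, b)]) x y :=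
      fun x y => pvConn_mono es _ (fun p hp => List.mem_append_left _ hp) x y
    have hab : pvConn (es ++ [(a, b)]) a b :=
      Relation.EqvGen.rel _ _ (List.mem_append_right _ (by simp))
    rintro (h | ⟨h1, h2⟩ | ⟨h1, h2⟩)
    · exact hmono _ _ h
    · exact Relation.EqvGen.trans _ _ _ (hmono _ _ h1) (Relation.EqvGen.trans _ _ _ hab (hmono _ _ h2))
    · exact Relation.EqvGen.trans _ _ _ (hmono _ _ h1)
        (Relation.EqvGen.trans _ _ _ (Relation.EqvGen.symm _ _ hab) (hmono _ _ h2))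

def pvUFInv (N : Nat) (uf : UFS) (es : List (Nat × Nat)) : Prop :=
  uf.root.length = N ∧ pvGood uf.root ∧ pvSizeOK uf.root uf.size ∧
    ∀ i j, pvRho uf.root i = pvRho uf.root j ↔ pvConn es i j

lemma pvUFInv_union (N : Nat) (uf : UFS) (es : List (Nat × Nat)) (a b : Nat)
    (ha : a < N) (hb : b < N) (h : pvUFInv N uf es) :
    pvUFInv N (pvUnion uf (a : Int) (b : Int)) (es ++ [(a, b)]) := by
  obtain ⟨root, size, part⟩ := uf
  obtain ⟨hlen, hG, hS, hcls⟩ := h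
  obtain ⟨h1, h2, h3, h4⟩ := pvUnion_spec root size part a b
    (by simpa [hlen] using ha) (by simpa [hlen] using hb) hG hS
  refine ⟨by rw [h1]; exact hlen, h2, h3, fun i j => ?_⟩
  rw [h4 i j, pvConn_append_pair es a b i j, hcls i j, hcls i a, hcls b j, hcls i b, hcls a j]

-- ===== chunk 4: initial state and sweep =====
lemma pvInit (N : Nat) :
    pvUFInv N ⟨PySem.List.pyRange 0 ((N : Nat) : Int) 1,
               PySem.List.pyRepeat [1] ((N : Nat) : Int), ((N : Nat) : Int)⟩ [] := by
  have hlen : (PySem.List.pyRange 0 ((N : Nat) : Int) 1).length = N := by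
    rw [PySem.List.length_pyRange_one]; simp
  have hpf : ∀ i, pvPf (PySem.List.pyRange 0 ((N : Nat) : Int) 1) i = i := by
    intro i
    unfold pvPf
    by_cases hi : i < N
    · rw [List.getD_eq_getElem _ _ (by rw [hlen]; exact hi)]
      rw [PySem.List.getElem_pyRange_one]
      simp
    · rw [List.getD_eq_default _ _ (by rw [hlen]; omega)]
      simp
  have hrho : ∀ i, pvRho (PySem.List.pyRange 0 ((N : Nat) : Int) 1) i = i :=
    fun i => Function.iterate_fixed (hpf i) _
  refine ⟨hlen, ⟨?_, ?_⟩, ⟨?_, ?_⟩, ?_⟩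
  · intro i hi
    rw [hlen] at hi
    constructor
    · rw [PySem.List.getElem_pyRange_one]; omega
    · rw [PySem.List.getElem_pyRange_one, hlen]; omega
  · intro i _ k _ _
    exact hpf i
  · rw [PySem.List.pyRepeat_singleton, List.length_replicate, hlen]; simp
  · intro r hr _
    rw [hlen] at hr ⊢
    rw [PySem.List.pyRepeat_singleton]
    rw [List.getD_eq_getElem _ _ (by simp; omega), List.getElem_replicate]
    have : (Finset.range N).filter (fun i => pvRho (PySem.List.pyRange 0 ((N : Nat) : Int) 1) i = r)
        = {r} := by
      ext x
      simp only [Finset.mem_filter, Finset.mem_range, hrho, Finset.mem_singleton]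
      constructor
      · exact fun h => h.2
      · intro h; exact ⟨by omega, h⟩
    rw [this]
    simp
  · intro i j
    rw [hrho, hrho]
    constructor
    · intro h; rw [h]; exact Relation.EqvGen.refl _
    · exact pvConn_nil i j

def pvWgt (ds : List (Int × Int × Int)) (t : Nat) : Int := (ds.getD t (0,0,0)).2.2
def pvPairs (ds : List (Int × Int × Int)) : List (Nat × Nat) :=
  ds.map (fun e => (e.1.toNat, e.2.1.toNat))
def pvEdgesOK (N : Nat) (ds : List (Int × Int × Int)) : Prop :=
  ∀ e ∈ ds, (∃ a < N, e.1 = ((a : Nat) : Int)) ∧ (∃ b < N, e.2.1 = ((b : Nat) : Int))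

lemma pvSweep_spec (ds : List (Int × Int × Int)) (N : Nat) (hok : pvEdgesOK N ds) (cur : Int) :
    ∀ (fuel : Nat) (j : Nat) (uf : UFS), ds.length - j < fuel → j ≤ ds.length →
    pvUFInv N uf (pvPairs (ds.take j)) →
    ∃ (j' : Nat) (uf' : UFS),
      pvSweep fuel ds ((ds.length : Nat) : Int) cur ((j : Nat) : Int) uf = (((j' : Nat) : Int), uf') ∧
      j ≤ j' ∧ j' ≤ ds.length ∧
      (∀ t, j ≤ t → t < j' → pvWgt ds t < cur) ∧
      (j' = ds.length ∨ (j' < ds.length ∧ ¬ pvWgt ds j' < cur)) ∧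
      pvUFInv N uf' (pvPairs (ds.take j')) := by
  intro fuel
  induction fuel with
  | zero => intro j uf hfuel; omega
  | succ fuel ih =>
    intro j uf hfuel hj hinv
    rw [pvSweep]
    by_cases hcond : ((j : Nat) : Int) < ((ds.length : Nat) : Int) ∧
        (PySem.List.pyGetD ds ((j : Nat) : Int) (0,0,0)).2.2 < cur
    · have hjlt : j < ds.length := by exact_mod_cast hcond.1
      have hgetd : PySem.List.pyGetD ds ((j : Nat) : Int) (0,0,0) = ds[j] := by
        rw [PySem.List.pyGetD_natCast, List.getD_eq_getElem _ _ hjlt]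
      obtain ⟨⟨a, haN, hae⟩, ⟨b, hbN, hbe⟩⟩ := hok ds[j] (List.getElem_mem hjlt)
      have hpairs : pvPairs (ds.take (j+1)) = pvPairs (ds.take j) ++ [(a, b)] := by
        unfold pvPairs
        rw [List.take_add_one, List.map_append]
        congr 1
        rw [List.getElem?_eq_getElem hjlt]
        simp [hae, hbe]
      have hinv' : pvUFInv N (pvUnion uf ((a : Nat) : Int) ((b : Nat) : Int))
          (pvPairs (ds.take (j+1))) := by
        rw [hpairs]
        exact pvUFInv_union N uf _ a b haN hbN hinv
      rw [if_pos hcond]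
      have harg : pvUnion uf (PySem.List.pyGetD ds ((j : Nat) : Int) (0,0,0)).1
          (PySem.List.pyGetD ds ((j : Nat) : Int) (0,0,0)).2.1
          = pvUnion uf ((a : Nat) : Int) ((b : Nat) : Int) := by
        rw [hgetd, hae, hbe]
      rw [harg]
      have hcast : ((j : Nat) : Int) + 1 = (((j+1 : Nat)) : Int) := by push_cast; ring
      rw [hcast]
      obtain ⟨j', uf', heq, h1, h2, h3, h4, h5⟩ :=
        ih (j+1) (pvUnion uf ((a : Nat) : Int) ((b : Nat) : Int)) (by omega) (by omega) hinv'
      refine ⟨j', uf', heq, by omega, h2, ?_, h4, h5⟩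
      intro t ht1 ht2
      rcases Nat.eq_or_lt_of_le ht1 with h | h
      · unfold pvWgt
        rw [← h, List.getD_eq_getElem _ _ hjlt]
        rw [hgetd] at hcond
        exact hcond.2
      · exact h3 t h ht2
    · rw [if_neg hcond]
      refine ⟨j, uf, rfl, le_refl _, hj, by omega, ?_, hinv⟩
      rcases Nat.eq_or_lt_of_le hj with h | h
      · exact Or.inl h
      · right
        refine ⟨h, ?_⟩
        intro hw
        apply hcond
        refine ⟨by exact_mod_cast h, ?_⟩
        unfold pvWgt at hw
        rw [PySem.List.pyGetD_natCast, List.getD_eq_getElem _ _ h]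
        rw [List.getD_eq_getElem _ _ h] at hw
        exact hw

-- ===== chunk 5: edges characterization =====
lemma pvMemIf {α : Type} (c : Prop) [Decidable c] (a e : α) :
    e ∈ (if c then [a] else []) ↔ c ∧ e = a := by
  split_ifs with h <;> simp [h]

lemma pvEdges_eq (grid : List (List Int)) (m n : Nat) :
    pvEdges grid ((m : Nat) : Int) ((n : Nat) : Int) =
      (List.range m).flatMap (fun (x : Nat) => (List.range n).flatMap (fun (y : Nat) =>
        (if x + 1 < m then
          [((x : Int)*(n : Int)+(y : Int), (x : Int)*(n : Int)+(n : Int)+(y : Int),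
            if pvCell grid (x : Int) (y : Int) > pvCell grid ((x : Int)+1) (y : Int)
            then pvCell grid (x : Int) (y : Int)
            else pvCell grid ((x : Int)+1) (y : Int))]
         else []) ++
        (if y + 1 < n then
          [((x : Int)*(n : Int)+(y : Int), (x : Int)*(n : Int)+1+(y : Int),
            if pvCell grid (x : Int) (y : Int) > pvCell grid (x : Int) ((y : Int)+1)
            then pvCell grid (x : Int) (y : Int)
            else pvCell grid (x : Int) ((y : Int)+1))]
         else []))) := by
  unfold pvEdges
  have hinner : ∀ i : Int, ∀ acc : List (Int × Int × Int),
      (PySem.List.pyRange 0 ((n : Nat) : Int) 1).foldl (fun acc j =>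
        let acc' := if i + 1 < ((m : Nat) : Int) then
            acc ++ [(i*((n : Nat) : Int)+j, i*((n : Nat) : Int)+((n : Nat) : Int)+j,
              if pvCell grid i j > pvCell grid (i+1) j then pvCell grid i j else pvCell grid (i+1) j)]
          else acc
        if j + 1 < ((n : Nat) : Int) then
            acc' ++ [(i*((n : Nat) : Int)+j, i*((n : Nat) : Int)+1+j,
              if pvCell grid i j > pvCell grid i (j+1) then pvCell grid i j else pvCell grid i (j+1))]
        else acc') acc
      = acc ++ (PySem.List.pyRange 0 ((n : Nat) : Int) 1).flatMap (fun j =>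
          (if i + 1 < ((m : Nat) : Int) then
            [(i*((n : Nat) : Int)+j, i*((n : Nat) : Int)+((n : Nat) : Int)+j,
              if pvCell grid i j > pvCell grid (i+1) j then pvCell grid i j else pvCell grid (i+1) j)]
           else []) ++
          (if j + 1 < ((n : Nat) : Int) then
            [(i*((n : Nat) : Int)+j, i*((n : Nat) : Int)+1+j,
              if pvCell grid i j > pvCell grid i (j+1) then pvCell grid i j else pvCell grid i (j+1))]
           else [])) := by
    intro i acc
    refine Eq.trans (PySem.List.foldl_congr_mem' _ _ _ _ ?_)
      (PySem.List.foldl_append_eq_flatMap _ _ _)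
    intro x _ acc'
    dsimp only
    split_ifs <;> simp
  refine Eq.trans (Eq.trans (PySem.List.foldl_congr_mem' _ _ _ _
      (fun x _ acc => hinner x acc)) (PySem.List.foldl_append_eq_flatMap _ _ _)) ?_
  rw [List.nil_append]
  rw [PySem.List.pyRange_one, PySem.List.pyRange_one]
  simp only [Int.sub_zero, Int.toNat_natCast, List.flatMap_map]
  apply List.flatMap_congr
  intro x hx
  apply List.flatMap_congr
  intro y hy
  have c1 : ((0:Int) + (x:Int) + 1 < ((m:Nat):Int)) = (x + 1 < m) := by
    apply propext; constructor <;> intro <;> omega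
  have c2 : ((0:Int) + (y:Int) + 1 < ((n:Nat):Int)) = (y + 1 < n) := by
    apply propext; constructor <;> intro <;> omega
  simp only [zero_add] at c1 c2 ⊢
  simp only [c1, c2]

lemma pvEdges_mem (grid : List (List Int)) (m n : Nat) (e : Int × Int × Int) :
    e ∈ pvEdges grid ((m : Nat) : Int) ((n : Nat) : Int) ↔
      (∃ x y : Nat, x + 1 < m ∧ y < n ∧
        e = ((x:Int)*(n:Int)+(y:Int), (x:Int)*(n:Int)+(n:Int)+(y:Int),
          if pvCell grid (x:Int) (y:Int) > pvCell grid ((x:Int)+1) (y:Int)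
          then pvCell grid (x:Int) (y:Int) else pvCell grid ((x:Int)+1) (y:Int))) ∨
      (∃ x y : Nat, x < m ∧ y + 1 < n ∧
        e = ((x:Int)*(n:Int)+(y:Int), (x:Int)*(n:Int)+1+(y:Int),
          if pvCell grid (x:Int) (y:Int) > pvCell grid (x:Int) ((y:Int)+1)
          then pvCell grid (x:Int) (y:Int) else pvCell grid (x:Int) ((y:Int)+1))) := by
  rw [pvEdges_eq]
  simp only [List.mem_flatMap, List.mem_range, List.mem_append, pvMemIf]
  constructor
  · rintro ⟨x, hx, y, hy, (⟨h1, he⟩ | ⟨h2, he⟩)⟩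
    · exact Or.inl ⟨x, y, h1, hy, he⟩
    · exact Or.inr ⟨x, y, hx, h2, he⟩
  · rintro (⟨x, y, h1, hy, he⟩ | ⟨x, y, hx, h2, he⟩)
    · exact ⟨x, by omega, y, hy, Or.inl ⟨h1, he⟩⟩
    · exact ⟨x, hx, y, by omega, Or.inr ⟨h2, he⟩⟩

lemma pvIdLt (x y m n : Nat) (hx : x < m) (hy : y < n) : x*n + y < m*n :=
  calc x*n + y < x*n + n := by omega
  _ = (x+1)*n := by ring
  _ ≤ m*n := Nat.mul_le_mul_right n hx

lemma pvMaxLt (a b q : Int) : (if a > b then a else b) < q ↔ a < q ∧ b < q := by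
  split_ifs <;> omega

lemma pvEdgesOK_edges (grid : List (List Int)) (m n : Nat) :
    pvEdgesOK (m*n) (pvEdges grid ((m : Nat) : Int) ((n : Nat) : Int)) := by
  intro e he
  rcases (pvEdges_mem grid m n e).mp he with ⟨x, y, h1, hy, he'⟩ | ⟨x, y, hx, h2, he'⟩
  · subst he'
    refine ⟨⟨x*n+y, pvIdLt x y m n (by omega) hy, by push_cast; ring⟩,
            ⟨(x+1)*n+y, pvIdLt (x+1) y m n h1 hy, by push_cast; ring⟩⟩
  · subst he'
    refine ⟨⟨x*n+y, pvIdLt x y m n hx (by omega), by push_cast; ring⟩,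
            ⟨x*n+(y+1), pvIdLt x (y+1) m n hx h2, by push_cast; ring⟩⟩

def pvEdgeRel (grid : List (List Int)) (m n : Nat) (q : Int) (s t : Nat) : Prop :=
  ∃ x y x' y' : Nat, x' < m ∧ y' < n ∧ ((x' = x + 1 ∧ y' = y) ∨ (x' = x ∧ y' = y + 1)) ∧
    pvCell grid (x:Int) (y:Int) < q ∧ pvCell grid (x':Int) (y':Int) < q ∧
    s = x*n+y ∧ t = x'*n+y'

lemma pvEsQ_mem (grid : List (List Int)) (m n : Nat) (q : Int) (p : Nat × Nat) :
    p ∈ pvPairs ((pvEdges grid ((m : Nat) : Int) ((n : Nat) : Int)).filter (fun e => e.2.2 < q)) ↔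
      pvEdgeRel grid m n q p.1 p.2 := by
  unfold pvPairs pvEdgeRel
  rw [List.mem_map]
  constructor
  · rintro ⟨e, he, hpe⟩
    rw [List.mem_filter] at he
    have hw := of_decide_eq_true he.2
    rcases (pvEdges_mem grid m n e).mp he.1 with ⟨x, y, h1, hy, he'⟩ | ⟨x, y, hx, h2, he'⟩
    · subst he'
      rw [pvMaxLt] at hw
      refine ⟨x, y, x+1, y, h1, hy, Or.inl ⟨rfl, rfl⟩, hw.1, by push_cast; exact hw.2, ?_, ?_⟩
      · rw [← hpe]
        show ((x:Int)*(n:Int)+(y:Int)).toNat = x*n+y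
        have : ((x:Int)*(n:Int)+(y:Int)) = ((x*n+y : Nat) : Int) := by push_cast; ring
        rw [this, Int.toNat_natCast]
      · rw [← hpe]
        show ((x:Int)*(n:Int)+(n:Int)+(y:Int)).toNat = (x+1)*n+y
        have : ((x:Int)*(n:Int)+(n:Int)+(y:Int)) = (((x+1)*n+y : Nat) : Int) := by push_cast; ring
        rw [this, Int.toNat_natCast]
    · subst he'
      rw [pvMaxLt] at hw
      refine ⟨x, y, x, y+1, hx, h2, Or.inr ⟨rfl, rfl⟩, hw.1, by push_cast; exact hw.2, ?_, ?_⟩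
      · rw [← hpe]
        show ((x:Int)*(n:Int)+(y:Int)).toNat = x*n+y
        have : ((x:Int)*(n:Int)+(y:Int)) = ((x*n+y : Nat) : Int) := by push_cast; ring
        rw [this, Int.toNat_natCast]
      · rw [← hpe]
        show ((x:Int)*(n:Int)+1+(y:Int)).toNat = x*n+(y+1)
        have : ((x:Int)*(n:Int)+1+(y:Int)) = ((x*n+(y+1) : Nat) : Int) := by push_cast; ring
        rw [this, Int.toNat_natCast]
  · rintro ⟨x, y, x', y', hx', hy', (⟨rfl, rfl⟩ | ⟨rfl, rfl⟩), hv1, hv2, hs, ht⟩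
    · refine ⟨((x:Int)*(n:Int)+(y':Int), (x:Int)*(n:Int)+(n:Int)+(y':Int),
        if pvCell grid (x:Int) (y':Int) > pvCell grid ((x:Int)+1) (y':Int)
        then pvCell grid (x:Int) (y':Int) else pvCell grid ((x:Int)+1) (y':Int)), ?_, ?_⟩
      · rw [List.mem_filter]
        refine ⟨(pvEdges_mem grid m n _).mpr (Or.inl ⟨x, y', by omega, by omega, rfl⟩), ?_⟩
        apply decide_eq_true
        rw [pvMaxLt]
        exact ⟨hv1, by push_cast at hv2 ⊢; exact hv2⟩
      · dsimp only
        have e1 : ((x:Int)*(n:Int)+(y':Int)) = ((x*n+y' : Nat) : Int) := by push_cast; ring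
        have e2 : ((x:Int)*(n:Int)+(n:Int)+(y':Int)) = (((x+1)*n+y' : Nat) : Int) := by push_cast; ring
        rw [e1, e2, Int.toNat_natCast, Int.toNat_natCast]
        exact Prod.ext hs.symm ht.symm
    · refine ⟨((x':Int)*(n:Int)+(y:Int), (x':Int)*(n:Int)+1+(y:Int),
        if pvCell grid (x':Int) (y:Int) > pvCell grid (x':Int) ((y:Int)+1)
        then pvCell grid (x':Int) (y:Int) else pvCell grid (x':Int) ((y:Int)+1)), ?_, ?_⟩
      · rw [List.mem_filter]
        refine ⟨(pvEdges_mem grid m n _).mpr (Or.inr ⟨x', y, by omega, by omega, rfl⟩), ?_⟩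
        apply decide_eq_true
        rw [pvMaxLt]
        exact ⟨hv1, by push_cast at hv2 ⊢; exact hv2⟩
      · dsimp only
        have e1 : ((x':Int)*(n:Int)+(y:Int)) = ((x'*n+y : Nat) : Int) := by push_cast; ring
        have e2 : ((x':Int)*(n:Int)+1+(y:Int)) = ((x'*n+(y+1) : Nat) : Int) := by push_cast; ring
        rw [e1, e2, Int.toNat_natCast, Int.toNat_natCast]
        exact Prod.ext hs.symm ht.symm

-- ===== chunk 6: reachability bridge =====
def pvAdj (x y x' y' : Nat) : Prop :=
  (x' = x + 1 ∧ y' = y) ∨ (x = x' + 1 ∧ y' = y) ∨ (x' = x ∧ y' = y + 1) ∨ (x' = x ∧ y = y' + 1)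

inductive pvReach (grid : List (List Int)) (m n : Nat) (q : Int) : Nat → Nat → Prop
  | start : pvReach grid m n q 0 0
  | step (x y x' y' : Nat) : pvReach grid m n q x y → x' < m → y' < n →
      pvCell grid (x' : Int) (y' : Int) < q → pvAdj x y x' y' → pvReach grid m n q x' y'

lemma pvReach_bounds (grid : List (List Int)) (m n : Nat) (q : Int) (hm : 0 < m) (hn : 0 < n)
    (x y : Nat) (h : pvReach grid m n q x y) : x < m ∧ y < n := by
  induction h with
  | start => exact ⟨hm, hn⟩
  | step x y x' y' _ hx' hy' _ _ _ => exact ⟨hx', hy'⟩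

lemma pvReach_val (grid : List (List Int)) (m n : Nat) (q : Int)
    (hq0 : pvCell grid 0 0 < q) (x y : Nat) (h : pvReach grid m n q x y) :
    pvCell grid (x : Int) (y : Int) < q := by
  induction h with
  | start => exact_mod_cast hq0
  | step x y x' y' _ _ _ hv _ _ => exact hv

lemma pvDecodeDiv (x y n : Nat) (hy : y < n) : (x*n+y)/n = x := by
  rw [Nat.mul_comm x n, Nat.mul_add_div (by omega)]
  rw [Nat.div_eq_of_lt hy]
  omega

lemma pvDecodeMod (x y n : Nat) (hy : y < n) : (x*n+y) % n = y := by
  rw [Nat.mul_comm x n, Nat.mul_add_mod]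
  exact Nat.mod_eq_of_lt hy

lemma pvReach_to_conn (grid : List (List Int)) (m n : Nat) (q : Int)
    (hm : 0 < m) (hn : 0 < n) (hq0 : pvCell grid 0 0 < q) (x y : Nat)
    (h : pvReach grid m n q x y) :
    pvConn (pvPairs ((pvEdges grid ((m : Nat) : Int) ((n : Nat) : Int)).filter
      (fun e => e.2.2 < q))) (x*n+y) 0 := by
  induction h with
  | start => simpa using Relation.EqvGen.refl _
  | step x y x' y' hr hx' hy' hv hadj ih =>
    have hxy := pvReach_bounds grid m n q hm hn x y hr
    have hvxy := pvReach_val grid m n q hq0 x y hr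
    rcases hadj with ⟨h1, h2⟩ | ⟨h1, h2⟩ | ⟨h1, h2⟩ | ⟨h1, h2⟩
    · -- x' = x+1, y' = y : forward edge (x,y) -> (x',y')
      have hedge : ((x*n+y, x'*n+y') : Nat × Nat) ∈ pvPairs ((pvEdges grid ((m : Nat) : Int) ((n : Nat) : Int)).filter (fun e => e.2.2 < q)) := by
        rw [pvEsQ_mem]
        exact ⟨x, y, x', y', hx', hy', Or.inl ⟨h1, h2⟩, hvxy, hv, rfl, rfl⟩
      exact Relation.EqvGen.trans _ _ _ (Relation.EqvGen.symm _ _ (Relation.EqvGen.rel _ _ hedge)) ih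
    · -- x = x'+1 : forward edge (x',y') -> (x,y)
      have hedge : ((x'*n+y', x*n+y) : Nat × Nat) ∈ pvPairs ((pvEdges grid ((m : Nat) : Int) ((n : Nat) : Int)).filter (fun e => e.2.2 < q)) := by
        rw [pvEsQ_mem]
        exact ⟨x', y', x, y, hxy.1, hxy.2, Or.inl ⟨h1, h2.symm ▸ rfl⟩, hv, hvxy, rfl, rfl⟩
      exact Relation.EqvGen.trans _ _ _ (Relation.EqvGen.rel _ _ hedge) ih
    · -- y' = y+1 : forward edge (x,y) -> (x',y')
      have hedge : ((x*n+y, x'*n+y') : Nat × Nat) ∈ pvPairs ((pvEdges grid ((m : Nat) : Int) ((n : Nat) : Int)).filter (fun e => e.2.2 < q)) := by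
        rw [pvEsQ_mem]
        exact ⟨x, y, x', y', hx', hy', Or.inr ⟨h1, h2⟩, hvxy, hv, rfl, rfl⟩
      exact Relation.EqvGen.trans _ _ _ (Relation.EqvGen.symm _ _ (Relation.EqvGen.rel _ _ hedge)) ih
    · -- y = y'+1 : forward edge (x',y') -> (x,y)
      have hedge : ((x'*n+y', x*n+y) : Nat × Nat) ∈ pvPairs ((pvEdges grid ((m : Nat) : Int) ((n : Nat) : Int)).filter (fun e => e.2.2 < q)) := by
        rw [pvEsQ_mem]
        exact ⟨x', y', x, y, hxy.1, hxy.2, Or.inr ⟨h1.symm ▸ rfl, h2⟩, hv, hvxy, rfl, rfl⟩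
      exact Relation.EqvGen.trans _ _ _ (Relation.EqvGen.rel _ _ hedge) ih

lemma pvAdj_symm (x y x' y' : Nat) (h : pvAdj x y x' y') : pvAdj x' y' x y := by
  unfold pvAdj at *; omega

lemma pvConn_iff_reach (grid : List (List Int)) (m n : Nat) (q : Int)
    (hm : 0 < m) (hn : 0 < n) (hq0 : pvCell grid 0 0 < q) (s : Nat) :
    pvConn (pvPairs ((pvEdges grid ((m : Nat) : Int) ((n : Nat) : Int)).filter
      (fun e => e.2.2 < q))) s 0 ↔ pvReach grid m n q (s/n) (s % n) := by
  constructor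
  · intro h
    have key : ∀ s t, pvConn (pvPairs ((pvEdges grid ((m : Nat) : Int) ((n : Nat) : Int)).filter
        (fun e => e.2.2 < q))) s t →
        (pvReach grid m n q (s/n) (s % n) ↔ pvReach grid m n q (t/n) (t % n)) := by
      intro s t hc
      induction hc with
      | rel a b hab =>
        rw [pvEsQ_mem] at hab
        obtain ⟨x, y, x', y', hx', hy', hadj, hv1, hv2, hsa, hsb⟩ := hab
        have hyn : y < n := by rcases hadj with ⟨_, h2⟩ | ⟨_, h2⟩ <;> omega
        have hxm : x < m := by rcases hadj with ⟨h1, _⟩ | ⟨h1, _⟩ <;> omega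
        have hadj' : pvAdj x y x' y' := by
          rcases hadj with ⟨h1, h2⟩ | ⟨h1, h2⟩
          · exact Or.inl ⟨h1, h2⟩
          · exact Or.inr (Or.inr (Or.inl ⟨h1, h2⟩))
        simp only at hsa hsb
        rw [hsa, hsb, pvDecodeDiv x y n hyn, pvDecodeMod x y n hyn,
          pvDecodeDiv x' y' n hy', pvDecodeMod x' y' n hy']
        constructor
        · intro hr
          exact pvReach.step x y x' y' hr hx' hy' hv2 hadj'
        · intro hr
          exact pvReach.step x' y' x y hr hxm hyn hv1 (pvAdj_symm _ _ _ _ hadj')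
      | refl a => exact Iff.rfl
      | symm a b _ ih => exact ih.symm
      | trans a b c _ _ ih1 ih2 => exact ih1.trans ih2
    rw [key s 0 h]
    simpa using pvReach.start
  · intro h
    have hd : (s/n)*n + s % n = s := by
      rw [Nat.mul_comm]
      exact Nat.div_add_mod s n
    have := pvReach_to_conn grid m n q hm hn hq0 _ _ h
    rwa [hd] at this

-- ===== chunk 7: flood fill =====
def pvInB (m n : Nat) (p : Int × Int) : Prop :=
  0 ≤ p.1 ∧ p.1 < (m : Int) ∧ 0 ≤ p.2 ∧ p.2 < (n : Int)

def pvSeenOK (grid : List (List Int)) (m n : Nat) (q : Int) (s : PySem.Set (Int × Int)) : Prop :=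
  s.Nodup ∧ (((0 : Int), (0 : Int)) ∈ s) ∧
    ∀ p ∈ s, pvInB m n p ∧ pvReach grid m n q p.1.toNat p.2.toNat

lemma pvSeenLen (m n : Nat) (s : List (Int × Int)) (hnd : s.Nodup)
    (hb : ∀ p ∈ s, pvInB m n p) : s.length ≤ m * n := by
  have hmap : (s.map (fun p => p.1.toNat * n + p.2.toNat)).Nodup := by
    apply (List.nodup_map_iff_inj_on hnd).mpr
    intro p hp p' hp' he
    obtain ⟨h1, h2, h3, h4⟩ := hb p hp
    obtain ⟨h1', h2', h3', h4'⟩ := hb p' hp'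
    have hy : p.2.toNat < n := by omega
    have hy' : p'.2.toNat < n := by omega
    have hdiv := pvDecodeDiv p.1.toNat p.2.toNat n hy
    have hmod := pvDecodeMod p.1.toNat p.2.toNat n hy
    have hdiv' := pvDecodeDiv p'.1.toNat p'.2.toNat n hy'
    have hmod' := pvDecodeMod p'.1.toNat p'.2.toNat n hy'
    have e1 : p.1.toNat = p'.1.toNat := by rw [← hdiv, ← hdiv', he]
    have e2 : p.2.toNat = p'.2.toNat := by rw [← hmod, ← hmod', he]
    have : p.1 = p'.1 := by omega
    have : p.2 = p'.2 := by omega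
    exact Prod.ext (by omega) (by omega)
  have hsub : ∀ z ∈ s.map (fun p => p.1.toNat * n + p.2.toNat), z ∈ List.range (m*n) := by
    intro z hz
    rw [List.mem_map] at hz
    obtain ⟨p, hp, rfl⟩ := hz
    obtain ⟨h1, h2, h3, h4⟩ := hb p hp
    rw [List.mem_range]
    exact pvIdLt _ _ m n (by omega) (by omega)
  have := List.Subperm.length_le (List.subperm_of_subset hmap hsub)
  simpa using this

lemma pvCondReach (grid : List (List Int)) (m n : Nat) (q : Int)
    (s : PySem.Set (Int × Int)) (hs : ∀ p ∈ s, pvInB m n p ∧ pvReach grid m n q p.1.toNat p.2.toNat)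
    (x y : Int) (hx : 0 ≤ x ∧ x < (m : Int)) (hy : 0 ≤ y ∧ y < (n : Int))
    (hval : pvCell grid x y < q)
    (hnb : PySem.Set.contains s (x+1, y) = true ∨ PySem.Set.contains s (x-1, y) = true ∨
           PySem.Set.contains s (x, y+1) = true ∨ PySem.Set.contains s (x, y-1) = true) :
    pvReach grid m n q x.toNat y.toNat := by
  have hcell : pvCell grid ((x.toNat : Nat) : Int) ((y.toNat : Nat) : Int) = pvCell grid x y := by
    rw [Int.toNat_of_nonneg hx.1, Int.toNat_of_nonneg hy.1]
  have hstep : ∀ p : Int × Int, p ∈ s → pvAdj p.1.toNat p.2.toNat x.toNat y.toNat →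
      pvReach grid m n q x.toNat y.toNat := by
    intro p hp hadj
    obtain ⟨_, hr⟩ := hs p hp
    have hxm : x.toNat < m := by omega
    have hyn : y.toNat < n := by omega
    have hv : pvCell grid ((x.toNat : Nat) : Int) ((y.toNat : Nat) : Int) < q := by
      rw [hcell]; exact hval
    exact pvReach.step p.1.toNat p.2.toNat x.toNat y.toNat hr hxm hyn hv hadj
  rcases hnb with h | h | h | h <;> rw [PySem.Set.contains_iff] at h
  · refine hstep _ h ?_
    obtain ⟨hb, _⟩ := hs _ h
    unfold pvInB at hb
    unfold pvAdj
    dsimp only at hb ⊢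
    omega
  · refine hstep _ h ?_
    obtain ⟨hb, _⟩ := hs _ h
    unfold pvInB at hb
    unfold pvAdj
    dsimp only at hb ⊢
    omega
  · refine hstep _ h ?_
    obtain ⟨hb, _⟩ := hs _ h
    unfold pvInB at hb
    unfold pvAdj
    dsimp only at hb ⊢
    omega
  · refine hstep _ h ?_
    obtain ⟨hb, _⟩ := hs _ h
    unfold pvInB at hb
    unfold pvAdj
    dsimp only at hb ⊢
    omega

lemma pvAddLen (s : PySem.Set (Int × Int)) (e : Int × Int)
    (h : ¬ (PySem.Set.contains s e = true)) : (PySem.Set.add s e).length = s.length + 1 := by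
  unfold PySem.Set.add
  rw [if_neg h]
  simp

lemma pvSubLen (s t : List (Int × Int)) (hnd : s.Nodup) (hsub : ∀ p ∈ s, p ∈ t) :
    s.length ≤ t.length :=
  List.Subperm.length_le (List.subperm_of_subset hnd hsub)

lemma pvFloodInner (grid : List (List Int)) (m n : Nat) (q : Int) (x : Int)
    (hx : 0 ≤ x ∧ x < (m : Int)) :
    ∀ (ys : List Int), (∀ y ∈ ys, 0 ≤ y ∧ y < (n : Int)) →
    ∀ st : PySem.Set (Int × Int) × Bool,
      pvSeenOK grid m n q st.1 →
      (∀ p ∈ st.1, p ∈ (ys.foldl (fun st y =>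
        if ¬ (PySem.Set.contains st.1 (x, y) = true) ∧ pvCell grid x y < q ∧
           (PySem.Set.contains st.1 (x+1, y) = true ∨ PySem.Set.contains st.1 (x-1, y) = true ∨
            PySem.Set.contains st.1 (x, y+1) = true ∨ PySem.Set.contains st.1 (x, y-1) = true)
        then (PySem.Set.add st.1 (x, y), true) else st) st).1) ∧
      pvSeenOK grid m n q (ys.foldl (fun st y =>
        if ¬ (PySem.Set.contains st.1 (x, y) = true) ∧ pvCell grid x y < q ∧
           (PySem.Set.contains st.1 (x+1, y) = true ∨ PySem.Set.contains st.1 (x-1, y) = true ∨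
            PySem.Set.contains st.1 (x, y+1) = true ∨ PySem.Set.contains st.1 (x, y-1) = true)
        then (PySem.Set.add st.1 (x, y), true) else st) st).1 ∧
      (st.2 = true → (ys.foldl (fun st y =>
        if ¬ (PySem.Set.contains st.1 (x, y) = true) ∧ pvCell grid x y < q ∧
           (PySem.Set.contains st.1 (x+1, y) = true ∨ PySem.Set.contains st.1 (x-1, y) = true ∨
            PySem.Set.contains st.1 (x, y+1) = true ∨ PySem.Set.contains st.1 (x, y-1) = true)
        then (PySem.Set.add st.1 (x, y), true) else st) st).2 = true) ∧
      ((ys.foldl (fun st y =>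
        if ¬ (PySem.Set.contains st.1 (x, y) = true) ∧ pvCell grid x y < q ∧
           (PySem.Set.contains st.1 (x+1, y) = true ∨ PySem.Set.contains st.1 (x-1, y) = true ∨
            PySem.Set.contains st.1 (x, y+1) = true ∨ PySem.Set.contains st.1 (x, y-1) = true)
        then (PySem.Set.add st.1 (x, y), true) else st) st).2 = false → (ys.foldl (fun st y =>
        if ¬ (PySem.Set.contains st.1 (x, y) = true) ∧ pvCell grid x y < q ∧
           (PySem.Set.contains st.1 (x+1, y) = true ∨ PySem.Set.contains st.1 (x-1, y) = true ∨
            PySem.Set.contains st.1 (x, y+1) = true ∨ PySem.Set.contains st.1 (x, y-1) = true)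
        then (PySem.Set.add st.1 (x, y), true) else st) st).1 = st.1) ∧
      (st.2 = false → (ys.foldl (fun st y =>
        if ¬ (PySem.Set.contains st.1 (x, y) = true) ∧ pvCell grid x y < q ∧
           (PySem.Set.contains st.1 (x+1, y) = true ∨ PySem.Set.contains st.1 (x-1, y) = true ∨
            PySem.Set.contains st.1 (x, y+1) = true ∨ PySem.Set.contains st.1 (x, y-1) = true)
        then (PySem.Set.add st.1 (x, y), true) else st) st).2 = true → st.1.length < (ys.foldl (fun st y =>
        if ¬ (PySem.Set.contains st.1 (x, y) = true) ∧ pvCell grid x y < q ∧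
           (PySem.Set.contains st.1 (x+1, y) = true ∨ PySem.Set.contains st.1 (x-1, y) = true ∨
            PySem.Set.contains st.1 (x, y+1) = true ∨ PySem.Set.contains st.1 (x, y-1) = true)
        then (PySem.Set.add st.1 (x, y), true) else st) st).1.length) ∧
      ((ys.foldl (fun st y =>
        if ¬ (PySem.Set.contains st.1 (x, y) = true) ∧ pvCell grid x y < q ∧
           (PySem.Set.contains st.1 (x+1, y) = true ∨ PySem.Set.contains st.1 (x-1, y) = true ∨
            PySem.Set.contains st.1 (x, y+1) = true ∨ PySem.Set.contains st.1 (x, y-1) = true)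
        then (PySem.Set.add st.1 (x, y), true) else st) st).2 = false → ∀ y ∈ ys,
        ¬ (¬ (PySem.Set.contains st.1 (x, y) = true) ∧ pvCell grid x y < q ∧
           (PySem.Set.contains st.1 (x+1, y) = true ∨ PySem.Set.contains st.1 (x-1, y) = true ∨
            PySem.Set.contains st.1 (x, y+1) = true ∨ PySem.Set.contains st.1 (x, y-1) = true))) := by
  intro ys
  induction ys with
  | nil =>
    intro _ st hok
    rw [List.foldl_nil]
    refine ⟨fun p hp => hp, hok, fun h => h, fun _ => rfl, fun h1 h2 => ?_,
      fun _ y hy => absurd hy (by simp)⟩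
    rw [h1] at h2
    cases h2
  | cons y ys ih =>
    intro hys st hok
    have hys' : ∀ y' ∈ ys, 0 ≤ y' ∧ y' < (n : Int) :=
      fun y' hy' => hys y' (List.mem_cons_of_mem _ hy')
    simp only [List.foldl_cons]
    by_cases hc : ¬ (PySem.Set.contains st.1 (x, y) = true) ∧ pvCell grid x y < q ∧
        (PySem.Set.contains st.1 (x+1, y) = true ∨ PySem.Set.contains st.1 (x-1, y) = true ∨
         PySem.Set.contains st.1 (x, y+1) = true ∨ PySem.Set.contains st.1 (x, y-1) = true)
    · rw [if_pos hc]
      have hyb : 0 ≤ y ∧ y < (n : Int) := hys y (by simp)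
      have hok' : pvSeenOK grid m n q (PySem.Set.add st.1 (x, y)) := by
        obtain ⟨hnd, h00, hprops⟩ := hok
        refine ⟨PySem.Set.nodup_add st.1 (x, y) hnd, (PySem.Set.mem_add _ _ _).mpr (Or.inl h00), ?_⟩
        intro p hp
        rcases (PySem.Set.mem_add _ _ _).mp hp with hp' | hp'
        · exact hprops p hp'
        · subst hp'
          refine ⟨⟨hx.1, hx.2, hyb.1, hyb.2⟩, ?_⟩
          exact pvCondReach grid m n q st.1 hprops x y hx hyb hc.2.1 hc.2.2
      obtain ⟨c1, c2, c3, c4, c5, c6⟩ := ih hys' (PySem.Set.add st.1 (x, y), true) hok'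
      have hmemadd : ∀ p ∈ st.1, p ∈ PySem.Set.add st.1 (x, y) :=
        fun p hp => (PySem.Set.mem_add _ _ _).mpr (Or.inl hp)
      refine ⟨fun p hp => c1 p (hmemadd p hp), c2, fun _ => c3 rfl, ?_, ?_, ?_⟩
      · intro hfalse
        exact absurd (c3 rfl) (by rw [hfalse]; simp)
      · intro _ _
        have hlt : st.1.length < (PySem.Set.add st.1 (x, y)).length := by
          rw [pvAddLen st.1 (x, y) hc.1]; omega
        exact hlt.trans_le (pvSubLen _ _ hok'.1 c1)
      · intro hfalse
        exact absurd (c3 rfl) (by rw [hfalse]; simp)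
    · rw [if_neg hc]
      obtain ⟨c1, c2, c3, c4, c5, c6⟩ := ih hys' st hok
      refine ⟨c1, c2, c3, c4, c5, ?_⟩
      intro hfalse y' hy'
      rcases List.mem_cons.mp hy' with rfl | hy''
      · exact hc
      · exact c6 hfalse y' hy''

lemma pvFloodOuter (grid : List (List Int)) (m n : Nat) (q : Int) :
    ∀ (xs : List Int), (∀ x ∈ xs, 0 ≤ x ∧ x < (m : Int)) →
    ∀ st : PySem.Set (Int × Int) × Bool,
      pvSeenOK grid m n q st.1 →
      (∀ p ∈ st.1, p ∈ (xs.foldl (fun st x =>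
        (PySem.List.pyRange 0 ((n : Nat) : Int) 1).foldl (fun st y =>
          if ¬ (PySem.Set.contains st.1 (x, y) = true) ∧ pvCell grid x y < q ∧
             (PySem.Set.contains st.1 (x+1, y) = true ∨ PySem.Set.contains st.1 (x-1, y) = true ∨
              PySem.Set.contains st.1 (x, y+1) = true ∨ PySem.Set.contains st.1 (x, y-1) = true)
          then (PySem.Set.add st.1 (x, y), true) else st) st) st).1) ∧
      pvSeenOK grid m n q (xs.foldl (fun st x =>
        (PySem.List.pyRange 0 ((n : Nat) : Int) 1).foldl (fun st y =>
          if ¬ (PySem.Set.contains st.1 (x, y) = true) ∧ pvCell grid x y < q ∧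
             (PySem.Set.contains st.1 (x+1, y) = true ∨ PySem.Set.contains st.1 (x-1, y) = true ∨
              PySem.Set.contains st.1 (x, y+1) = true ∨ PySem.Set.contains st.1 (x, y-1) = true)
          then (PySem.Set.add st.1 (x, y), true) else st) st) st).1 ∧
      (st.2 = true → (xs.foldl (fun st x =>
        (PySem.List.pyRange 0 ((n : Nat) : Int) 1).foldl (fun st y =>
          if ¬ (PySem.Set.contains st.1 (x, y) = true) ∧ pvCell grid x y < q ∧
             (PySem.Set.contains st.1 (x+1, y) = true ∨ PySem.Set.contains st.1 (x-1, y) = true ∨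
              PySem.Set.contains st.1 (x, y+1) = true ∨ PySem.Set.contains st.1 (x, y-1) = true)
          then (PySem.Set.add st.1 (x, y), true) else st) st) st).2 = true) ∧
      ((xs.foldl (fun st x =>
        (PySem.List.pyRange 0 ((n : Nat) : Int) 1).foldl (fun st y =>
          if ¬ (PySem.Set.contains st.1 (x, y) = true) ∧ pvCell grid x y < q ∧
             (PySem.Set.contains st.1 (x+1, y) = true ∨ PySem.Set.contains st.1 (x-1, y) = true ∨
              PySem.Set.contains st.1 (x, y+1) = true ∨ PySem.Set.contains st.1 (x, y-1) = true)
          then (PySem.Set.add st.1 (x, y), true) else st) st) st).2 = false → (xs.foldl (fun st x =>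
        (PySem.List.pyRange 0 ((n : Nat) : Int) 1).foldl (fun st y =>
          if ¬ (PySem.Set.contains st.1 (x, y) = true) ∧ pvCell grid x y < q ∧
             (PySem.Set.contains st.1 (x+1, y) = true ∨ PySem.Set.contains st.1 (x-1, y) = true ∨
              PySem.Set.contains st.1 (x, y+1) = true ∨ PySem.Set.contains st.1 (x, y-1) = true)
          then (PySem.Set.add st.1 (x, y), true) else st) st) st).1 = st.1) ∧
      (st.2 = false → (xs.foldl (fun st x =>
        (PySem.List.pyRange 0 ((n : Nat) : Int) 1).foldl (fun st y =>
          if ¬ (PySem.Set.contains st.1 (x, y) = true) ∧ pvCell grid x y < q ∧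
             (PySem.Set.contains st.1 (x+1, y) = true ∨ PySem.Set.contains st.1 (x-1, y) = true ∨
              PySem.Set.contains st.1 (x, y+1) = true ∨ PySem.Set.contains st.1 (x, y-1) = true)
          then (PySem.Set.add st.1 (x, y), true) else st) st) st).2 = true → st.1.length < (xs.foldl (fun st x =>
        (PySem.List.pyRange 0 ((n : Nat) : Int) 1).foldl (fun st y =>
          if ¬ (PySem.Set.contains st.1 (x, y) = true) ∧ pvCell grid x y < q ∧
             (PySem.Set.contains st.1 (x+1, y) = true ∨ PySem.Set.contains st.1 (x-1, y) = true ∨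
              PySem.Set.contains st.1 (x, y+1) = true ∨ PySem.Set.contains st.1 (x, y-1) = true)
          then (PySem.Set.add st.1 (x, y), true) else st) st) st).1.length) ∧
      ((xs.foldl (fun st x =>
        (PySem.List.pyRange 0 ((n : Nat) : Int) 1).foldl (fun st y =>
          if ¬ (PySem.Set.contains st.1 (x, y) = true) ∧ pvCell grid x y < q ∧
             (PySem.Set.contains st.1 (x+1, y) = true ∨ PySem.Set.contains st.1 (x-1, y) = true ∨
              PySem.Set.contains st.1 (x, y+1) = true ∨ PySem.Set.contains st.1 (x, y-1) = true)
          then (PySem.Set.add st.1 (x, y), true) else st) st) st).2 = false → ∀ x ∈ xs, ∀ y ∈ PySem.List.pyRange 0 ((n : Nat) : Int) 1,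
        ¬ (¬ (PySem.Set.contains st.1 (x, y) = true) ∧ pvCell grid x y < q ∧
           (PySem.Set.contains st.1 (x+1, y) = true ∨ PySem.Set.contains st.1 (x-1, y) = true ∨
            PySem.Set.contains st.1 (x, y+1) = true ∨ PySem.Set.contains st.1 (x, y-1) = true))) := by
  intro xs
  induction xs with
  | nil =>
    intro _ st hok
    rw [List.foldl_nil]
    refine ⟨fun p hp => hp, hok, fun h => h, fun _ => rfl, fun h1 h2 => ?_,
      fun _ x hx => absurd hx (by simp)⟩
    rw [h1] at h2
    cases h2
  | cons x xs ih =>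
    intro hxs st hok
    have hxs' : ∀ x' ∈ xs, 0 ≤ x' ∧ x' < (m : Int) :=
      fun x' hx' => hxs x' (List.mem_cons_of_mem _ hx')
    have hxb : 0 ≤ x ∧ x < (m : Int) := hxs x (by simp)
    have hyb : ∀ y ∈ PySem.List.pyRange 0 ((n : Nat) : Int) 1, 0 ≤ y ∧ y < (n : Int) := by
      intro y hy
      rw [PySem.List.mem_pyRange_one] at hy
      exact hy
    rw [List.foldl_cons]
    obtain ⟨i1, i2, i3, i4, i5, i6⟩ := pvFloodInner grid m n q x hxb
      (PySem.List.pyRange 0 ((n : Nat) : Int) 1) hyb st hok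
    set st' := (PySem.List.pyRange 0 ((n : Nat) : Int) 1).foldl (fun st y =>
          if ¬ (PySem.Set.contains st.1 (x, y) = true) ∧ pvCell grid x y < q ∧
             (PySem.Set.contains st.1 (x+1, y) = true ∨ PySem.Set.contains st.1 (x-1, y) = true ∨
              PySem.Set.contains st.1 (x, y+1) = true ∨ PySem.Set.contains st.1 (x, y-1) = true)
          then (PySem.Set.add st.1 (x, y), true) else st) st with hst'
    obtain ⟨c1, c2, c3, c4, c5, c6⟩ := ih hxs' st' i2
    refine ⟨fun p hp => c1 p (i1 p hp), c2, fun h => c3 (i3 h), ?_, ?_, ?_⟩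
    · intro hfalse
      have hst2 : st'.2 = false := by
        cases h : st'.2
        · rfl
        · rw [c3 h] at hfalse; cases hfalse
      rw [c4 hfalse, i4 hst2]
    · intro hstf hfin
      cases h : st'.2
      · have := c5 h hfin
        rwa [i4 h] at this
      · have h1 := i5 hstf h
        exact h1.trans_le (pvSubLen _ _ i2.1 c1)
    · intro hfalse
      have hst2 : st'.2 = false := by
        cases h : st'.2
        · rfl
        · rw [c3 h] at hfalse; cases hfalse
      intro x' hx' y hy
      rcases List.mem_cons.mp hx' with rfl | hx''
      · exact i6 hst2 y hy
      · have := c6 hfalse x' hx'' y hy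
        rwa [i4 hst2] at this

lemma pvFlood_loop (grid : List (List Int)) (m n : Nat) (q : Int) :
    ∀ (fuel : Nat) (seen : PySem.Set (Int × Int)),
      pvSeenOK grid m n q seen → m * n + 1 - seen.length ≤ fuel →
      pvSeenOK grid m n q (pvFlood fuel grid ((m : Nat) : Int) ((n : Nat) : Int) q seen) ∧
      (∀ p ∈ seen, p ∈ pvFlood fuel grid ((m : Nat) : Int) ((n : Nat) : Int) q seen) ∧
      (∀ x ∈ PySem.List.pyRange 0 ((m : Nat) : Int) 1,
       ∀ y ∈ PySem.List.pyRange 0 ((n : Nat) : Int) 1,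
        ¬ (¬ (PySem.Set.contains (pvFlood fuel grid ((m : Nat) : Int) ((n : Nat) : Int) q seen) (x, y) = true) ∧
           pvCell grid x y < q ∧
           (PySem.Set.contains (pvFlood fuel grid ((m : Nat) : Int) ((n : Nat) : Int) q seen) (x+1, y) = true ∨
            PySem.Set.contains (pvFlood fuel grid ((m : Nat) : Int) ((n : Nat) : Int) q seen) (x-1, y) = true ∨
            PySem.Set.contains (pvFlood fuel grid ((m : Nat) : Int) ((n : Nat) : Int) q seen) (x, y+1) = true ∨
            PySem.Set.contains (pvFlood fuel grid ((m : Nat) : Int) ((n : Nat) : Int) q seen) (x, y-1) = true))) := by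
  intro fuel
  induction fuel with
  | zero =>
    intro seen hok hfuel
    have := pvSeenLen m n seen hok.1 (fun p hp => (hok.2.2 p hp).1)
    omega
  | succ fuel ih =>
    intro seen hok hfuel
    rw [pvFlood]
    have hxb : ∀ x ∈ PySem.List.pyRange 0 ((m : Nat) : Int) 1, 0 ≤ x ∧ x < (m : Int) := by
      intro x hx
      rw [PySem.List.mem_pyRange_one] at hx
      exact hx
    obtain ⟨o1, o2, o3, o4, o5, o6⟩ := pvFloodOuter grid m n q
      (PySem.List.pyRange 0 ((m : Nat) : Int) 1) hxb (seen, false) hok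
    show _ ∧ _ ∧ _
    by_cases hp2 : (pvFloodPass grid ((m : Nat) : Int) ((n : Nat) : Int) q (seen, false)).2 = true
    · rw [if_pos (by unfold pvFloodPass at hp2 ⊢; rw [hp2])]
      have hlt : seen.length < (pvFloodPass grid ((m : Nat) : Int) ((n : Nat) : Int) q (seen, false)).1.length := by
        unfold pvFloodPass at hp2 ⊢
        exact o5 rfl hp2
      have hok' : pvSeenOK grid m n q (pvFloodPass grid ((m : Nat) : Int) ((n : Nat) : Int) q (seen, false)).1 := by
        unfold pvFloodPass
        exact o2
      obtain ⟨r1, r2, r3⟩ := ih (pvFloodPass grid ((m : Nat) : Int) ((n : Nat) : Int) q (seen, false)).1 hok' (by omega)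
      refine ⟨r1, ?_, r3⟩
      intro p hp
      apply r2
      unfold pvFloodPass
      exact o1 p hp
    · rw [if_neg (by unfold pvFloodPass at hp2 ⊢; simpa using hp2)]
      have hfalse : (pvFloodPass grid ((m : Nat) : Int) ((n : Nat) : Int) q (seen, false)).2 = false := by
        simpa using hp2
      have heq : (pvFloodPass grid ((m : Nat) : Int) ((n : Nat) : Int) q (seen, false)).1 = seen := by
        unfold pvFloodPass at hfalse ⊢
        exact o4 hfalse
      rw [heq]
      refine ⟨hok, fun p hp => hp, ?_⟩
      intro x hx y hy
      have := o6 (by unfold pvFloodPass at hfalse; exact hfalse) x hx y hy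
      simpa [heq] using this

lemma pvFlood_mem (grid : List (List Int)) (m n : Nat) (q : Int)
    (hm : 0 < m) (hn : 0 < n) (fuel : Nat) (hfuel : m * n ≤ fuel) :
    (pvFlood fuel grid ((m : Nat) : Int) ((n : Nat) : Int) q
      (PySem.Set.ofList [((0 : Int), (0 : Int))])).Nodup ∧
    ∀ p : Int × Int,
      p ∈ pvFlood fuel grid ((m : Nat) : Int) ((n : Nat) : Int) q
        (PySem.Set.ofList [((0 : Int), (0 : Int))]) ↔
      (pvInB m n p ∧ pvReach grid m n q p.1.toNat p.2.toNat) := by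
  have hok0 : pvSeenOK grid m n q (PySem.Set.ofList [((0 : Int), (0 : Int))]) := by
    refine ⟨PySem.Set.nodup_ofList _, (PySem.Set.mem_ofList _ _).mpr (by simp), ?_⟩
    intro p hp
    rw [PySem.Set.mem_ofList] at hp
    simp only [List.mem_singleton] at hp
    subst hp
    refine ⟨⟨by norm_num, by norm_num; exact_mod_cast hm, by norm_num, by norm_num; exact_mod_cast hn⟩, by simpa using pvReach.start⟩
  have hlen0 : (PySem.Set.ofList [((0 : Int), (0 : Int))] : List (Int × Int)).length = 1 := rfl
  obtain ⟨hok, hsub, hclosed⟩ := pvFlood_loop grid m n q fuel _ hok0 (by omega)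
  have main : ∀ x y : Nat, pvReach grid m n q x y →
      (((x : Nat) : Int), ((y : Nat) : Int)) ∈ pvFlood fuel grid ((m : Nat) : Int) ((n : Nat) : Int) q
        (PySem.Set.ofList [((0 : Int), (0 : Int))]) := by
    intro x y hr
    induction hr with
  | start => exact hsub _ ((PySem.Set.mem_ofList _ _).mpr (by simp))
  | step x y x' y' hr hx' hy' hv hadj ih =>
    set R := pvFlood fuel grid ((m : Nat) : Int) ((n : Nat) : Int) q
      (PySem.Set.ofList [((0 : Int), (0 : Int))]) with hR
    by_cases hc : PySem.Set.contains R (((x' : Nat) : Int), ((y' : Nat) : Int)) = true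
    · exact (PySem.Set.contains_iff _ _).mp hc
    · exfalso
      apply hclosed (((x' : Nat)) : Int) (by rw [PySem.List.mem_pyRange_one]; constructor <;> omega)
        (((y' : Nat)) : Int) (by rw [PySem.List.mem_pyRange_one]; constructor <;> omega)
      refine ⟨hc, by exact_mod_cast hv, ?_⟩
      have hmem : (((x : Nat) : Int), ((y : Nat) : Int)) ∈ R := ih
      rcases hadj with ⟨h1, h2⟩ | ⟨h1, h2⟩ | ⟨h1, h2⟩ | ⟨h1, h2⟩
      · refine Or.inr (Or.inl ?_)
        rw [PySem.Set.contains_iff]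
        have he : (((x' : Nat) : Int) - 1, ((y' : Nat) : Int)) = (((x : Nat) : Int), ((y : Nat) : Int)) := by
          rw [Prod.mk.injEq]; constructor <;> omega
        rw [he]; exact hmem
      · refine Or.inl ?_
        rw [PySem.Set.contains_iff]
        have he : (((x' : Nat) : Int) + 1, ((y' : Nat) : Int)) = (((x : Nat) : Int), ((y : Nat) : Int)) := by
          rw [Prod.mk.injEq]; constructor <;> omega
        rw [he]; exact hmem
      · refine Or.inr (Or.inr (Or.inr ?_))
        rw [PySem.Set.contains_iff]
        have he : (((x' : Nat) : Int), ((y' : Nat) : Int) - 1) = (((x : Nat) : Int), ((y : Nat) : Int)) := by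
          rw [Prod.mk.injEq]; constructor <;> omega
        rw [he]; exact hmem
      · refine Or.inr (Or.inr (Or.inl ?_))
        rw [PySem.Set.contains_iff]
        have he : (((x' : Nat) : Int), ((y' : Nat) : Int) + 1) = (((x : Nat) : Int), ((y : Nat) : Int)) := by
          rw [Prod.mk.injEq]; constructor <;> omega
        rw [he]; exact hmem
  refine ⟨hok.1, fun p => ⟨fun hp => (hok.2.2 p hp), fun ⟨hb, hr⟩ => ?_⟩⟩
  have hp1 : p = (((p.1.toNat : Nat) : Int), ((p.2.toNat : Nat) : Int)) := by
    obtain ⟨h1, _, h3, _⟩ := hb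
    exact Prod.ext (by omega) (by omega)
  rw [hp1]
  exact main _ _ hr

-- ===== chunk 8: assembly =====
lemma pvSizeOK_transfer (root root' size : List Int) (hr : ∀ j, pvRho root' j = pvRho root j)
    (hl : root'.length = root.length) (hS : pvSizeOK root size) : pvSizeOK root' size := by
  refine ⟨hS.1.trans hl.symm, ?_⟩
  intro r hr' hrr
  rw [hl] at hr'
  rw [hS.2 r hr' (by rw [← hr]; exact hrr), hl,
    Finset.filter_congr (fun x _ => by rw [hr] :
      ∀ x ∈ Finset.range root.length, pvRho root' x = r ↔ pvRho root x = r)]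

lemma pvUFInv_congr (N : Nat) (uf : UFS) (es es' : List (Nat × Nat))
    (h : ∀ p, p ∈ es ↔ p ∈ es') (hinv : pvUFInv N uf es) : pvUFInv N uf es' := by
  obtain ⟨h1, h2, h3, h4⟩ := hinv
  exact ⟨h1, h2, h3, fun i j => (h4 i j).trans (pvConn_congr es es' h i j)⟩

lemma pvUFInv_find0 (N : Nat) (uf : UFS) (es : List (Nat × Nat)) (hN : 0 < N)
    (hinv : pvUFInv N uf es) :
    pvUFInv N ⟨(pvFind uf.root 0).1, uf.size, uf.part⟩ es ∧
    (pvFind uf.root 0).2 = ((pvRho uf.root 0 : Nat) : Int) := by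
  obtain ⟨hlen, hG, hS, hcls⟩ := hinv
  have h0 : (0 : Nat) < uf.root.length := by omega
  obtain ⟨hv, hl, hg, hr⟩ := pvFind_spec uf.root hG 0 h0
  have hcast : ((0 : Nat) : Int) = (0 : Int) := rfl
  rw [hcast] at hv hl hg hr
  refine ⟨⟨by rw [hl]; exact hlen, hg, ?_, fun i j => by rw [hr, hr]; exact hcls i j⟩, hv⟩
  exact pvSizeOK_transfer uf.root _ uf.size hr hl hS

lemma pvPrefix_filter (ds : List (Int × Int × Int)) (cur : Int) (j' : Nat) (hj : j' ≤ ds.length)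
    (hlow : ∀ t < j', pvWgt ds t < cur)
    (hhigh : ∀ t, j' ≤ t → t < ds.length → ¬ pvWgt ds t < cur) :
    ∀ e, e ∈ ds.take j' ↔ (e ∈ ds ∧ e.2.2 < cur) := by
  intro e
  constructor
  · intro he
    obtain ⟨t, ht, hte⟩ := List.getElem_of_mem he
    rw [List.getElem_take] at hte
    have htl : t < ds.length := by
      have h1 : (ds.take j').length = min j' ds.length := List.length_take
      omega
    have htj : t < j' := by
      have h1 : (ds.take j').length = min j' ds.length := List.length_take
      omega
    refine ⟨hte ▸ List.getElem_mem htl, ?_⟩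
    have := hlow t htj
    unfold pvWgt at this
    rwa [List.getD_eq_getElem _ _ htl, hte] at this
  · rintro ⟨he, hw⟩
    obtain ⟨t, htl, hte⟩ := List.getElem_of_mem he
    have htj : t < j' := by
      by_contra hge
      apply hhigh t (by omega) htl
      unfold pvWgt
      rwa [List.getD_eq_getElem _ _ htl, hte]
    have : (ds.take j')[t]'(by rw [List.length_take]; omega) = e := by
      rw [List.getElem_take]; exact hte
    exact this ▸ List.getElem_mem _

lemma pvEncInj (m n : Nat) (p p' : Int × Int) (hb : pvInB m n p) (hb' : pvInB m n p')
    (he : p.1.toNat * n + p.2.toNat = p'.1.toNat * n + p'.2.toNat) : p = p' := by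
  obtain ⟨h1, h2, h3, h4⟩ := hb
  obtain ⟨h1', h2', h3', h4'⟩ := hb'
  have hy : p.2.toNat < n := by omega
  have hy' : p'.2.toNat < n := by omega
  have e1 : p.1.toNat = p'.1.toNat := by
    rw [← pvDecodeDiv p.1.toNat p.2.toNat n hy, ← pvDecodeDiv p'.1.toNat p'.2.toNat n hy', he]
  have e2 : p.2.toNat = p'.2.toNat := by
    rw [← pvDecodeMod p.1.toNat p.2.toNat n hy, ← pvDecodeMod p'.1.toNat p'.2.toNat n hy', he]
  exact Prod.ext (by omega) (by omega)

lemma pvCount_eq_len (grid : List (List Int)) (m n : Nat) (q : Int)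
    (hm : 0 < m) (hn : 0 < n) (hq0 : pvCell grid 0 0 < q) (root : List Int)
    (hcls : ∀ i j : Nat, pvRho root i = pvRho root j ↔
      pvConn (pvPairs ((pvEdges grid ((m : Nat) : Int) ((n : Nat) : Int)).filter
        (fun e => e.2.2 < q))) i j) :
    (((Finset.range (m*n)).filter (fun i => pvRho root i = pvRho root 0)).card : Int)
      = ((pvFlood (m*n+1) grid ((m : Nat) : Int) ((n : Nat) : Int) q
          (PySem.Set.ofList [((0 : Int), (0 : Int))])).length : Int) := by
  obtain ⟨hnd, hmem⟩ := pvFlood_mem grid m n q hm hn (m*n+1) (by omega)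
  set R := pvFlood (m*n+1) grid ((m : Nat) : Int) ((n : Nat) : Int) q
      (PySem.Set.ofList [((0 : Int), (0 : Int))]) with hR
  have hmapnd : (R.map (fun p => p.1.toNat * n + p.2.toNat)).Nodup := by
    apply (List.nodup_map_iff_inj_on hnd).mpr
    intro p hp p' hp' he
    exact pvEncInj m n p p' ((hmem p).mp hp).1 ((hmem p').mp hp').1 he
  have hsetEq : (R.map (fun p => p.1.toNat * n + p.2.toNat)).toFinset
      = (Finset.range (m*n)).filter (fun i => pvRho root i = pvRho root 0) := by
    ext t
    rw [List.mem_toFinset, List.mem_map, Finset.mem_filter, Finset.mem_range]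
    constructor
    · rintro ⟨p, hp, rfl⟩
      obtain ⟨⟨hb1, hb2, hb3, hb4⟩, hr⟩ := (hmem p).mp hp
      have hxm : p.1.toNat < m := by omega
      have hyn : p.2.toNat < n := by omega
      refine ⟨pvIdLt _ _ m n hxm hyn, ?_⟩
      rw [hcls]
      rw [pvConn_iff_reach grid m n q hm hn hq0 _]
      rw [pvDecodeDiv _ _ n hyn, pvDecodeMod _ _ n hyn]
      exact hr
    · rintro ⟨ht, hrho⟩
      rw [hcls, pvConn_iff_reach grid m n q hm hn hq0 t] at hrho
      refine ⟨(((t/n : Nat) : Int), ((t % n : Nat) : Int)), ?_, ?_⟩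
      · rw [hmem]
        have hdm : t / n < m := by
          rw [Nat.div_lt_iff_lt_mul hn]
          omega
        have hmn : t % n < n := Nat.mod_lt t hn
        refine ⟨?_, ?_⟩
        · unfold pvInB
          dsimp only
          exact ⟨Int.natCast_nonneg _, by exact_mod_cast hdm, Int.natCast_nonneg _, by exact_mod_cast hmn⟩
        · simpa using hrho
      · simp only [Int.toNat_natCast]
        rw [Nat.mul_comm]
        exact Nat.div_add_mod t n
  have hcard : ((Finset.range (m*n)).filter (fun i => pvRho root i = pvRho root 0)).card
      = R.length := by
    rw [← hsetEq, List.toFinset_card_of_nodup hmapnd, List.length_map]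
  rw [hcard]

def pvValB (grid : List (List Int)) (m n : Nat) (q : Int) : Int :=
  if pvCell grid 0 0 ≥ q then 0
  else ((pvFlood (m*n+1) grid ((m : Nat) : Int) ((n : Nat) : Int) q
    (PySem.Set.ofList [((0 : Int), (0 : Int))])).length : Int)

lemma pvAlt_eq (grid : List (List Int)) (queries : List Int) :
    lc_2503_alt grid queries =
      queries.map (pvValB grid grid.length (PySem.List.pyGetD grid 0 []).length) := by
  unfold lc_2503_alt
  rw [PySem.List.len_eq, PySem.List.len_eq]
  have hfuel : ((grid.length : Int) * ((PySem.List.pyGetD grid 0 []).length : Int)).toNat + 1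
      = grid.length * (PySem.List.pyGetD grid 0 []).length + 1 := by
    have : ((grid.length : Int) * ((PySem.List.pyGetD grid 0 []).length : Int))
        = ((grid.length * (PySem.List.pyGetD grid 0 []).length : Nat) : Int) := by push_cast; ring
    rw [this, Int.toNat_natCast]
  refine Eq.trans (PySem.List.foldl_congr_mem' _ _
    (fun ans q => ans ++ [pvValB grid grid.length (PySem.List.pyGetD grid 0 []).length q]) _ ?_)
    (by rw [PySem.List.foldl_append_singleton_eq_map, List.nil_append])
  intro q _ ans
  unfold pvValB
  dsimp only
  split_ifs with h
  · rfl
  · rw [PySem.List.len_eq, hfuel]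

lemma pvMainFold (grid : List (List Int)) (queries : List Int) (m n : Nat)
    (hm : 0 < m) (hn : 0 < n) (ds : List (Int × Int × Int))
    (hok : pvEdgesOK (m*n) ds)
    (hmono : ∀ a b : Nat, a ≤ b → b < ds.length → pvWgt ds a ≤ pvWgt ds b)
    (hperm : ∀ e, e ∈ ds ↔ e ∈ pvEdges grid ((m : Nat) : Int) ((n : Nat) : Int)) :
    ∀ (ind : List Int) (j : Nat) (uf : UFS) (ans : List Int),
    (∀ d ∈ ind, ∃ t : Nat, d = ((t : Nat) : Int) ∧ t < queries.length) →
    ind.Pairwise (fun d d' => PySem.List.pyGetD queries d 0 ≤ PySem.List.pyGetD queries d' 0) →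
    ind.Nodup →
    j ≤ ds.length →
    (∀ d ∈ ind, ∀ t < j, pvWgt ds t < PySem.List.pyGetD queries d 0) →
    pvUFInv (m*n) uf (pvPairs (ds.take j)) →
    ans.length = queries.length →
    (∀ t : Nat, t < queries.length → ((t : Nat) : Int) ∈ ind → ans.getD t 0 = 0) →
    (ind.foldl (fun (st : Int × UFS × List Int) i =>
      let cur := PySem.List.pyGetD queries i 0
      let sw := pvSweep (ds.length + 1) ds ((ds.length : Nat) : Int) cur st.1 st.2.1
      if cur > pvCell grid 0 0 then
        (sw.1, { sw.2 with root := (pvFind sw.2.root 0).1 },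
         PySem.List.pySetD st.2.2 i (PySem.List.pyGetD sw.2.size (pvFind sw.2.root 0).2 0))
      else (sw.1, sw.2, st.2.2)) (((j : Nat) : Int), uf, ans)).2.2.length = queries.length ∧
    ∀ t : Nat, t < queries.length →
      (ind.foldl (fun (st : Int × UFS × List Int) i =>
      let cur := PySem.List.pyGetD queries i 0
      let sw := pvSweep (ds.length + 1) ds ((ds.length : Nat) : Int) cur st.1 st.2.1
      if cur > pvCell grid 0 0 then
        (sw.1, { sw.2 with root := (pvFind sw.2.root 0).1 },
         PySem.List.pySetD st.2.2 i (PySem.List.pyGetD sw.2.size (pvFind sw.2.root 0).2 0))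
      else (sw.1, sw.2, st.2.2)) (((j : Nat) : Int), uf, ans)).2.2.getD t 0 =
        (if ((t : Nat) : Int) ∈ ind then pvValB grid m n (queries.getD t 0) else ans.getD t 0) := by
  intro ind
  induction ind with
  | nil =>
    intro j uf ans _ _ _ _ _ _ hlen _
    rw [List.foldl_nil]
    exact ⟨hlen, fun t ht => by rw [if_neg (by simp)]⟩
  | cons d rest ih =>
    intro j uf ans hmem hpw hnd hj hpref hinv hlen hz
    obtain ⟨i0, rfl, hi0⟩ := hmem d (by simp)
    rw [List.foldl_cons]
    have hcur : PySem.List.pyGetD queries ((i0 : Nat) : Int) 0 = queries.getD i0 0 := by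
      simp
    obtain ⟨j', uf', heq, hjle, hj'le, hlow, hstop, hinv'⟩ :=
      pvSweep_spec ds (m*n) hok (PySem.List.pyGetD queries ((i0 : Nat) : Int) 0)
        (ds.length + 1) j uf (by omega) hj hinv
    have hlow' : ∀ t < j', pvWgt ds t < PySem.List.pyGetD queries ((i0 : Nat) : Int) 0 := by
      intro t ht
      by_cases htj : t < j
      · exact hpref _ (by simp) t htj
      · exact hlow t (by omega) ht
    have hhigh : ∀ t, j' ≤ t → t < ds.length →
        ¬ pvWgt ds t < PySem.List.pyGetD queries ((i0 : Nat) : Int) 0 := by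
      intro t ht htl hcon
      rcases hstop with h | ⟨h1, h2⟩
      · omega
      · exact h2 (lt_of_le_of_lt (hmono j' t ht htl) hcon)
    have hmemiff : ∀ p, p ∈ pvPairs (ds.take j') ↔
        p ∈ pvPairs ((pvEdges grid ((m : Nat) : Int) ((n : Nat) : Int)).filter
          (fun e => e.2.2 < PySem.List.pyGetD queries ((i0 : Nat) : Int) 0)) := by
      intro p
      unfold pvPairs
      rw [List.mem_map, List.mem_map]
      constructor
      · rintro ⟨e, he, rfl⟩
        refine ⟨e, ?_, rfl⟩
        rw [List.mem_filter]
        have := (pvPrefix_filter ds _ j' hj'le hlow' hhigh e).mp he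
        exact ⟨(hperm e).mp this.1, decide_eq_true this.2⟩
      · rintro ⟨e, he, rfl⟩
        refine ⟨e, ?_, rfl⟩
        rw [List.mem_filter] at he
        exact (pvPrefix_filter ds _ j' hj'le hlow' hhigh e).mpr
          ⟨(hperm e).mpr he.1, of_decide_eq_true he.2⟩
    have hinvF := pvUFInv_congr _ _ _ _ hmemiff hinv'
    have hpw' : rest.Pairwise (fun d d' => PySem.List.pyGetD queries d 0 ≤ PySem.List.pyGetD queries d' 0) :=
      (List.pairwise_cons.mp hpw).2
    have hheadle : ∀ d' ∈ rest, PySem.List.pyGetD queries ((i0 : Nat) : Int) 0 ≤ PySem.List.pyGetD queries d' 0 :=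
      (List.pairwise_cons.mp hpw).1
    have hmem' : ∀ d' ∈ rest, ∃ t : Nat, d' = ((t : Nat) : Int) ∧ t < queries.length :=
      fun d' hd' => hmem d' (List.mem_cons_of_mem _ hd')
    have hnd' : rest.Nodup := (List.nodup_cons.mp hnd).2
    have hd0nr : ((i0 : Nat) : Int) ∉ rest := (List.nodup_cons.mp hnd).1
    have hpref' : ∀ d' ∈ rest, ∀ t < j', pvWgt ds t < PySem.List.pyGetD queries d' 0 :=
      fun d' hd' t ht => lt_of_lt_of_le (hlow' t ht) (hheadle d' hd')
    dsimp only
    rw [heq]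
    dsimp only
    by_cases hbr : PySem.List.pyGetD queries ((i0 : Nat) : Int) 0 > pvCell grid 0 0
    · rw [if_pos hbr]
      obtain ⟨hinvC0, hfv⟩ := pvUFInv_find0 (m*n) uf' _ (by positivity) hinvF
      have hinvC := pvUFInv_congr _ _ _ _ (fun p => (hmemiff p).symm) hinvC0
      have hvalue : PySem.List.pyGetD uf'.size (pvFind uf'.root 0).2 0
          = pvValB grid m n (queries.getD i0 0) := by
        rw [hfv]
        rw [PySem.List.pyGetD_natCast]
        obtain ⟨hl', hG', hS', hcls'⟩ := hinvF
        have hr0 : pvRho uf'.root (pvRho uf'.root 0) = pvRho uf'.root 0 :=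
          pvRho_eq_of_fix _ _ (pvRho_fix _ hG' 0)
        have hrlt : pvRho uf'.root 0 < m*n := by
          rw [← hl']
          exact pvRho_lt _ hG'.1 0 (by rw [hl']; positivity)
        rw [hS'.2 _ (by rw [hl']; exact hrlt) hr0]
        have hfilter : (Finset.range uf'.root.length).filter (fun i => pvRho uf'.root i = pvRho uf'.root 0)
            = (Finset.range (m*n)).filter (fun i => pvRho uf'.root i = pvRho uf'.root 0) := by
          rw [hl']
        rw [hfilter]
        rw [pvCount_eq_len grid m n _ hm hn (by rw [hcur] at hbr; omega) uf'.root
          (fun i j => by rw [hcur] at hcls'; exact hcls' i j)]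
        unfold pvValB
        rw [if_neg (by rw [hcur] at hbr; omega)]
    -- state after this query
      obtain ⟨f1, f2⟩ := ih j' { uf' with root := (pvFind uf'.root 0).1 }
        (PySem.List.pySetD ans ((i0 : Nat) : Int) (PySem.List.pyGetD uf'.size (pvFind uf'.root 0).2 0))
        hmem' hpw' hnd' hj'le hpref' hinvC
        (by rw [PySem.List.pySetD_natCast, List.length_set]; exact hlen)
        (by
          intro t ht htm
          rw [PySem.List.pySetD_natCast, pvGetD_set_ne]
          · exact hz t ht (List.mem_cons_of_mem _ htm)
          · intro hti
            apply hd0nr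
            subst hti
            exact htm)
      refine ⟨f1, ?_⟩
      intro t ht
      rw [f2 t ht]
      by_cases htr : ((t : Nat) : Int) ∈ rest
      · rw [if_pos htr, if_pos (List.mem_cons_of_mem _ htr)]
      · rw [if_neg htr]
        by_cases hti : t = i0
        · subst hti
          rw [if_pos (by simp)]
          rw [PySem.List.pySetD_natCast, pvGetD_set_self _ _ _ _ (by omega), hvalue]
        · rw [if_neg (by
            intro hc
            rcases List.mem_cons.mp hc with hc' | hc'
            · exact hti (by exact_mod_cast hc')
            · exact htr hc')]
          rw [PySem.List.pySetD_natCast, pvGetD_set_ne _ _ _ _ _ (by omega)]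
    · rw [if_neg hbr]
      obtain ⟨f1, f2⟩ := ih j' uf' ans hmem' hpw' hnd' hj'le hpref' hinv' hlen
        (fun t ht htm => hz t ht (List.mem_cons_of_mem _ htm))
      refine ⟨f1, ?_⟩
      intro t ht
      rw [f2 t ht]
      by_cases htr : ((t : Nat) : Int) ∈ rest
      · rw [if_pos htr, if_pos (List.mem_cons_of_mem _ htr)]
      · rw [if_neg htr]
        by_cases hti : t = i0
        · subst hti
          rw [if_pos (by simp)]
          rw [hz _ ht (by simp)]
          unfold pvValB
          rw [if_pos (by rw [hcur] at hbr; omega)]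
        · rw [if_neg (by
            intro hc
            rcases List.mem_cons.mp hc with hc' | hc'
            · exact hti (by exact_mod_cast hc')
            · exact htr hc')]

lemma pvExtGetD (l1 l2 : List Int) (h : l1.length = l2.length)
    (h2 : ∀ t, t < l2.length → l1.getD t 0 = l2.getD t 0) : l1 = l2 := by
  apply List.ext_getElem h
  intro t h1 h2'
  have h3 := h2 t h2'
  rwa [List.getD_eq_getElem _ _ h1, List.getD_eq_getElem _ _ h2'] at h3

theorem pvFinal (grid : List (List Int)) (queries : List Int)
    (hg : grid ≠ []) (hq : grid.headI = [] → queries = []) :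
    lc_2503 grid queries = lc_2503_alt grid queries := by
  rcases List.eq_nil_or_concat queries with hqe | _
  case _ =>
    subst hqe
    unfold lc_2503 lc_2503_alt
    dsimp only
    have h1 : PySem.List.len ([] : List Int) = ((0 : Nat) : Int) := by
      rw [PySem.List.len_eq]; rfl
    rw [h1]
    have h2 : PySem.List.pyRange 0 ((0 : Nat) : Int) 1 = [] := by
      rw [PySem.List.pyRange_one]; rfl
    rw [h2]
    have h3 : PySem.List.sorted ([] : List Int) (fun d => PySem.List.pyGetD ([] : List Int) d 0) false = [] :=
      List.Perm.eq_nil (PySem.List.sorted_perm _ _ _)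
    rw [h3, List.foldl_nil, List.foldl_nil]
    rw [PySem.List.pyRepeat_singleton]
    rfl
  case _ =>
    by_cases hqnil : queries = []
    · subst hqnil
      unfold lc_2503 lc_2503_alt
      dsimp only
      have h1 : PySem.List.len ([] : List Int) = ((0 : Nat) : Int) := by
        rw [PySem.List.len_eq]; rfl
      rw [h1]
      have h2 : PySem.List.pyRange 0 ((0 : Nat) : Int) 1 = [] := by
        rw [PySem.List.pyRange_one]; rfl
      rw [h2]
      have h3 : PySem.List.sorted ([] : List Int) (fun d => PySem.List.pyGetD ([] : List Int) d 0) false = [] :=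
        List.Perm.eq_nil (PySem.List.sorted_perm _ _ _)
      rw [h3, List.foldl_nil, List.foldl_nil]
      rw [PySem.List.pyRepeat_singleton]
      rfl
    · -- queries nonempty: full machinery
      set m := grid.length with hm'
      set n := (PySem.List.pyGetD grid 0 []).length with hn'
      have hm : 0 < m := by
        cases grid
        · exact absurd rfl hg
        · simp [hm']
      have hn : 0 < n := by
        have hh : grid.headI ≠ [] := fun h => hqnil (hq h)
        cases grid with
        | nil => exact absurd rfl hg
        | cons g0 gs =>
          have : PySem.List.pyGetD (g0 :: gs) 0 [] = g0 := by
            rw [PySem.List.pyGetD_zero]; rfl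
          rw [hn', this]
          simp only [List.headI] at hh
          exact List.length_pos_of_ne_nil hh
      clear hm' hn'
      have hlg : PySem.List.len grid = ((m : Nat) : Int) := PySem.List.len_eq grid
      have hln : PySem.List.len (PySem.List.pyGetD grid 0 []) = ((n : Nat) : Int) :=
        PySem.List.len_eq _
      -- the sorted edge list exactly as the port builds it
      set ds := PySem.List.sorted (pvEdges grid ((m : Nat) : Int) ((n : Nat) : Int))
        (fun d => d.2.2) false with hds'
      have hperm : ∀ e, e ∈ ds ↔ e ∈ pvEdges grid ((m : Nat) : Int) ((n : Nat) : Int) :=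
        fun e => (PySem.List.sorted_perm _ _ _).mem_iff
      have hok : pvEdgesOK (m*n) ds :=
        fun e he => pvEdgesOK_edges grid m n e ((hperm e).mp he)
      have hmono : ∀ a b : Nat, a ≤ b → b < ds.length → pvWgt ds a ≤ pvWgt ds b := by
        intro a b hab hb
        unfold pvWgt
        rw [List.getD_eq_getElem _ _ (lt_of_le_of_lt hab hb), List.getD_eq_getElem _ _ hb]
        exact PySem.List.key_sorted_getElem_mono (pvEdges grid ((m : Nat) : Int) ((n : Nat) : Int))
          (fun d : Int × Int × Int => d.2.2) hab hb
      set indE := PySem.List.sorted (PySem.List.pyRange 0 (PySem.List.len queries) 1)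
        (fun d => PySem.List.pyGetD queries d 0) false with hind'
      have hindperm : ∀ d, d ∈ indE ↔ d ∈ PySem.List.pyRange 0 (PySem.List.len queries) 1 :=
        fun d => (PySem.List.sorted_perm _ _ _).mem_iff
      have hmem : ∀ d ∈ indE, ∃ t : Nat, d = ((t : Nat) : Int) ∧ t < queries.length := by
        intro d hd
        rw [hindperm, PySem.List.len_eq, PySem.List.mem_pyRange_one] at hd
        refine ⟨d.toNat, by omega, by omega⟩
      have hpw : indE.Pairwise (fun d d' =>
          PySem.List.pyGetD queries d 0 ≤ PySem.List.pyGetD queries d' 0) :=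
        PySem.List.sorted_pairwise _ _
      have hnd : indE.Nodup :=
        (PySem.List.sorted_perm _ _ _).nodup_iff.mpr (PySem.List.nodup_pyRange_one _ _)
      have hmemt : ∀ t : Nat, t < queries.length → ((t : Nat) : Int) ∈ indE := by
        intro t ht
        rw [hindperm, PySem.List.len_eq, PySem.List.mem_pyRange_one]
        constructor
        · positivity
        · exact_mod_cast ht
      have harg : PySem.List.len grid * PySem.List.len (PySem.List.pyGetD grid 0 [])
          = ((m*n : Nat) : Int) := by rw [hlg, hln]; push_cast; ring
      have huf0 : pvUFInv (m*n)
          ⟨PySem.List.pyRange 0 (PySem.List.len grid * PySem.List.len (PySem.List.pyGetD grid 0 [])) 1,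
           PySem.List.pyRepeat [1] (PySem.List.len grid * PySem.List.len (PySem.List.pyGetD grid 0 [])),
           PySem.List.len grid * PySem.List.len (PySem.List.pyGetD grid 0 [])⟩
          (pvPairs (ds.take 0)) := by
        rw [List.take_zero]
        have hpp : pvPairs ([] : List (Int × Int × Int)) = [] := rfl
        rw [hpp, harg]
        exact pvInit (m*n)
      have hanslen : (PySem.List.pyRepeat [(0 : Int)] (PySem.List.len queries)).length
          = queries.length := by
        rw [PySem.List.pyRepeat_singleton, List.length_replicate, PySem.List.len_eq,
          Int.toNat_natCast]
      have hansz : ∀ t : Nat, t < queries.length → ((t : Nat) : Int) ∈ indE →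
          (PySem.List.pyRepeat [(0 : Int)] (PySem.List.len queries)).getD t 0 = 0 := by
        intro t ht _
        rw [PySem.List.pyRepeat_singleton, PySem.List.len_eq, Int.toNat_natCast]
        rw [List.getD_eq_getElem _ _ (by rw [List.length_replicate]; exact ht)]
        simp
      obtain ⟨hlenF, hgetF⟩ := pvMainFold grid queries m n hm hn ds hok hmono hperm indE 0
        ⟨PySem.List.pyRange 0 (PySem.List.len grid * PySem.List.len (PySem.List.pyGetD grid 0 [])) 1,
         PySem.List.pyRepeat [1] (PySem.List.len grid * PySem.List.len (PySem.List.pyGetD grid 0 [])),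
         PySem.List.len grid * PySem.List.len (PySem.List.pyGetD grid 0 [])⟩
        (PySem.List.pyRepeat [(0 : Int)] (PySem.List.len queries))
        hmem hpw hnd (by omega) (fun d _ t ht => absurd ht (by omega)) huf0 hanslen hansz
      rw [pvAlt_eq]
      unfold lc_2503
      dsimp only
      apply pvExtGetD
      · rw [List.length_map]
        exact hlenF
      · intro t ht'
        have ht : t < queries.length := by rwa [List.length_map] at ht'
        have hG := hgetF t ht
        rw [if_pos (hmemt t ht)] at hG
        have hmapgetD : (queries.map (pvValB grid m n)).getD t 0
            = pvValB grid m n (queries.getD t 0) := by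
          rw [List.getD_eq_getElem _ _ ht', List.getElem_map, List.getD_eq_getElem _ _ ht]
        rw [hmapgetD]
        exact hG

-- ===== VERDICT (by name: the statement is the Claim_ definition above) =====
theorem lc_2503_spec : Claim_equal_lc_2503 := by
  intro grid queries _ hpre
  unfold Spec_lc_2503
  exact pvFinal grid queries hpre.1 hpre.2.2
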